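-- pv_equiv track=rewrite | github.com/suminjeff/baekjoon | 백준/Gold/16947. 서울 지하철 2호선/서울 지하철 2호선.py | solve
-- ===== SOURCE A (Python) =====
-- from collections import deque
--
-- def solve(n, edges):
--     graph = [[] for _ in range(n+1)]
--     for u, v in edges:
--         graph[u].append(v)
--         graph[v].append(u)
--
--     parent = [_ for _ in range(n+1)]
--
--     def find(x):
--         if parent[x] != x:
--             parent[x] = find(parent[x])
--         return parent[x]
--
--     def union(x, y):
--         p, q = find(x), find(y)
--         if p != q:
--             parent[max(p, q)] = parent[min(p, q)]
--             return {'msg': 'success'}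
--         else:
--             parent[x] = parent[y] = 0
--             return {'msg': 'cycle', 'start': min(x, y), 'end': max(x, y)}
--
--     is_cycle = [False]*(n+1)
--     cycle_start, cycle_end = int(), int()
--     for u, v in edges:
--         result = union(u, v)
--         if result.get('msg') == 'cycle':
--             cycle_start = result.get('start')
--             cycle_end = result.get('end')
--             is_cycle[cycle_start] = True
--             is_cycle[cycle_end] = True
--
--     visited = [0]*(n+1)
--     visited[cycle_start] = visited[cycle_end] = 1
--     que = deque([[cycle_start, str(cycle_start)]])
--
--     while que:
--         v, path = que.popleft()
--
--         for nv in graph[v]: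
--             if visited[nv] == 0:
--                 visited[nv] = 1
--                 que.append([nv, path+' '+str(nv)])
--             else:
--                 if nv == cycle_end:
--                     cycle_list = list(map(lambda x:int(x), path.split()[1:]))
--                     if not cycle_list:
--                         continue
--                     for cv in cycle_list:
--                         is_cycle[cv] = True
--                     break
--     distance = [-1]*(n+1)
--     cycle_que = deque()
--     for v in range(1, n+1):
--         if is_cycle[v]:
--             cycle_que.append(v)
--             distance[v] = 0
--
--     while cycle_que:
--         v = cycle_que.pop()
--         for nv in graph[v]:
--             if distance[nv] == -1:
--                 distance[nv] = distance[v] + 1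
--                 cycle_que.append(nv)
--     return distance[1:]
-- ===== SOURCE B (Python) =====
-- # B: iterative two-pass union-find (root walk + pointer rewrite) replaces A's
-- # recursive dict-returning union; the cycle-recovery BFS keeps one predecessor
-- # pointer per node and backtracks it instead of storing and re-parsing a growing
-- # whitespace-joined path string per queue entry; the final spreading pass runs on
-- # a left-ended deque used as a stack. Objective: alternative (same cost in
-- # measurement; different data structures and traversal bookkeeping).
-- from collections import deque
--
-- def solve(n, edges):
--     adj = [[] for _ in range(n + 1)]
--     for u, v in edges:
--         adj[u].append(v)
--         adj[v].append(u)
--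
--     boss = list(range(n + 1))
--
--     def root(x):
--         while boss[x] != x:
--             x = boss[x]
--         return x
--
--     def compress(x, r):
--         while boss[x] != x:
--             boss[x], x = r, boss[x]
--
--     cs = ce = 0
--     is_cycle = [False] * (n + 1)
--     for u, v in edges:
--         ru = root(u)
--         compress(u, ru)
--         rv = root(v)
--         compress(v, rv)
--         if ru != rv:
--             boss[max(ru, rv)] = min(ru, rv)
--         else:
--             boss[u] = boss[v] = 0
--             cs, ce = min(u, v), max(u, v)
--             is_cycle[cs] = is_cycle[ce] = True
--
--     seen = [0] * (n + 1)
--     seen[cs] = seen[ce] = 1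
--     pred = [0] * (n + 1)
--     bfs = deque([cs])
--     while bfs:
--         v = bfs.popleft()
--         for w in adj[v]:
--             if seen[w] == 0:
--                 seen[w] = 1
--                 pred[w] = v
--                 bfs.append(w)
--             elif w == ce:
--                 if v == cs:
--                     continue
--                 u2 = v
--                 while u2 != cs:
--                     is_cycle[u2] = True
--                     u2 = pred[u2]
--                 break
--
--     dist = [-1] + [0 if is_cycle[v] else -1 for v in range(1, n + 1)]
--     stack = deque(v for v in range(n, 0, -1) if is_cycle[v])
--     while stack:
--         v = stack.popleft()
--         for w in adj[v]:
--             if dist[w] == -1: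
--                 dist[w] = dist[v] + 1
--                 stack.appendleft(w)
--     return dist[1:]
-- ===== Notes on version B (the rewrite author's own statement) =====
-- stated objective: alternative
-- what changed: B replaces A's recursive dict-returning union step by an iterative two-pass root-walk-then-pointer-rewrite union-find, recovers the cycle by backtracking a single predecessor-pointer array instead of storing and re-parsing a whitespace-joined path string per BFS queue entry, and runs the final spreading pass on a left-ended deque used as a stack.
import Mathlib
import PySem

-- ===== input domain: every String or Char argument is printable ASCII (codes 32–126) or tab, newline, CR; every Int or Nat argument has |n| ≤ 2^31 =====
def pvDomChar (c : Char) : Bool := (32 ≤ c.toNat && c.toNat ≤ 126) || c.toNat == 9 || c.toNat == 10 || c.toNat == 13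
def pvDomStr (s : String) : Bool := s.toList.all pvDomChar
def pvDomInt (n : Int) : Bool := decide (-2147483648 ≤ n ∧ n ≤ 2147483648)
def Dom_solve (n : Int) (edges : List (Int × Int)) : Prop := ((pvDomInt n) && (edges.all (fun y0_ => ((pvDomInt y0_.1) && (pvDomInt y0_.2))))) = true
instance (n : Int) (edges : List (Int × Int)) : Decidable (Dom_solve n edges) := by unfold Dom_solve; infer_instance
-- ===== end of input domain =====

-- B replaces A's recursive dict-returning union-find by an iterative two-pass
-- root/compress walk, recovers the cycle by backtracking one predecessor pointer
-- per node instead of storing and re-parsing a whitespace-joined path string per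
-- BFS queue entry, and runs the final spreading pass on a left-ended stack
-- (objective: alternative bookkeeping, same measured cost).

-- ===== PORT A =====
-- graph[u].append(v)
def pvAdj (g : List (List Int)) (i x : Int) : List (List Int) :=
  PySem.List.pySetD g i (PySem.List.pyGetD g i [] ++ [x])

-- for u, v in edges: graph[u].append(v); graph[v].append(u)
def pvBuildGraph : List (Int × Int) → List (List Int) → List (List Int)
  | [], g => g
  | (u, v) :: es, g => pvBuildGraph es (pvAdj (pvAdj g u v) v u)

-- def find(x): path-compressing recursive find; fuel-guarded (the fuel passed by the
-- port never runs out on inputs satisfying Pre_solve)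
def pvFind : Nat → List Int → Int → List Int × Int
  | 0, parent, x => (parent, PySem.List.pyGetD parent x 0)
  | fuel+1, parent, x =>
    let px := PySem.List.pyGetD parent x 0
    if px ≠ x then
      let r := pvFind fuel parent px
      (PySem.List.pySetD r.1 x r.2, r.2)
    else (parent, px)

-- for v in range(1, n+1): if is_cycle[v]: cycle_que.append(v); distance[v] = 0
def pvInit3 (isc : List Bool) : List Int → List Int × List Int → List Int × List Int
  | [], st => st
  | v :: vs, (que, dist) =>
    if PySem.List.pyGetD isc v false = true then
      pvInit3 isc vs (que ++ [v], PySem.List.pySetD dist v 0)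
    else pvInit3 isc vs (que, dist)

-- inner `for nv in graph[v]` of the distance loop
def pvInner3 (v : Int) : List Int → List Int → List Int → List Int × List Int
  | [], que, dist => (que, dist)
  | nv :: nvs, que, dist =>
    if PySem.List.pyGetD dist nv 0 = -1 then
      pvInner3 v nvs (que ++ [nv]) (PySem.List.pySetD dist nv (PySem.List.pyGetD dist v 0 + 1))
    else pvInner3 v nvs que dist

-- while cycle_que: v = cycle_que.pop()  (pop from the RIGHT: a LIFO stack)
def pvLoop3 (graph : List (List Int)) : Nat → List Int → List Int → List Int
  | 0, _, dist => dist
  | fuel+1, que, dist =>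
    match que.getLast? with
    | none => dist
    | some v =>
      let r := pvInner3 v (PySem.List.pyGetD graph v []) que.dropLast dist
      pvLoop3 graph fuel r.1 r.2

-- A's union(x, y): returns the {'msg': …} dict (values are str-or-int)
def pvUnionA (fuel : Nat) (parent : List Int) (x y : Int) :
    List Int × PySem.Dict String (Sum String Int) :=
  let r1 := pvFind fuel parent x
  let r2 := pvFind fuel r1.1 y
  if r1.2 ≠ r2.2 then
    (PySem.List.pySetD r2.1 (max r1.2 r2.2) (PySem.List.pyGetD r2.1 (min r1.2 r2.2) 0),
     PySem.Dict.ofList [("msg", Sum.inl "success")])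
  else
    (PySem.List.pySetD (PySem.List.pySetD r2.1 x 0) y 0,
     PySem.Dict.ofList [("msg", Sum.inl "cycle"), ("start", Sum.inr (min x y)), ("end", Sum.inr (max x y))])

-- A's `for u, v in edges: result = union(u, v); if result.get('msg') == 'cycle': …`
def pvLoop1A (fuel : Nat) : List (Int × Int) → List Int × Int × Int × List Bool → List Int × Int × Int × List Bool
  | [], st => st
  | (u, v) :: es, (parent, cs, ce, isc) =>
    let r := pvUnionA fuel parent u v
    if r.2.get? "msg" = some (Sum.inl "cycle") then
      -- a 'cycle' dict always carries integer 'start'/'end'; the fallbacks are dead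
      let s := match r.2.get? "start" with | some (Sum.inr k) => k | _ => 0
      let e := match r.2.get? "end" with | some (Sum.inr k) => k | _ => 0
      pvLoop1A fuel es (r.1, s, e, PySem.List.pySetD (PySem.List.pySetD isc s true) e true)
    else pvLoop1A fuel es (r.1, cs, ce, isc)

-- A's inner `for nv in graph[v]` of the path BFS (paths carried as strings = List Char)
def pvInnerA (ce : Int) (path : List Char) :
    List Int → List (Int × List Char) → List Int → List Bool →
    List (Int × List Char) × List Int × List Bool
  | [], acc, visited, isc => (acc, visited, isc)
  | nv :: nvs, acc, visited, isc =>
    if PySem.List.pyGetD visited nv 0 = 0 then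
      pvInnerA ce path nvs (acc ++ [(nv, path ++ ' ' :: PySem.Int.toChars nv)])
        (PySem.List.pySetD visited nv 1) isc
    else if nv = ce then
      -- cycle_list = list(map(int, path.split()[1:]))  (int() never fails: tokens are str(int))
      let cycleList := ((PySem.Chars.split₀ path).drop 1).map (fun t => (PySem.Int.ofChars? t).getD 0)
      if cycleList = [] then pvInnerA ce path nvs acc visited isc   -- continue
      else (acc, visited, cycleList.foldl (fun a cv => PySem.List.pySetD a cv true) isc)  -- mark, break
    else pvInnerA ce path nvs acc visited isc

-- A's `while que: v, path = que.popleft(); …`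
def pvBfsA (graph : List (List Int)) (ce : Int) :
    Nat → List (Int × List Char) → List Int → List Bool → List Bool
  | 0, _, _, isc => isc
  | fuel+1, que, visited, isc =>
    match que with
    | [] => isc
    | (v, path) :: rest =>
      let r := pvInnerA ce path (PySem.List.pyGetD graph v []) [] visited isc
      pvBfsA graph ce fuel (rest ++ r.1) r.2.1 r.2.2

def solve (n : Int) (edges : List (Int × Int)) : List Int :=
  let rng := PySem.List.pyRange 0 (n+1) 1
  let fuel := (n+1).toNat + 2
  let graph := pvBuildGraph edges (rng.map (fun _ => ([] : List Int)))
  let parent := rng                                   -- [_ for _ in range(n+1)]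
  let st := pvLoop1A fuel edges (parent, 0, 0, rng.map (fun _ => false))
  let cs := st.2.1
  let ce := st.2.2.1
  let visited := PySem.List.pySetD (PySem.List.pySetD (rng.map (fun _ => (0:Int))) cs 1) ce 1
  let isc := pvBfsA graph ce fuel [(cs, PySem.Int.toChars cs)] visited st.2.2.2
  let r3 := pvInit3 isc (PySem.List.pyRange 1 (n+1) 1) ([], rng.map (fun _ => (-1:Int)))
  let dist := pvLoop3 graph (2 * (n+1).toNat + 2) r3.1 r3.2
  PySem.List.slice dist (some 1) none                 -- distance[1:]

-- ===== PORT B =====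
-- adjacency list built by folding Source B's edge loop
def pvLinkB (g : List (List Int)) (e : Int × Int) : List (List Int) :=
  let g1 := PySem.List.pySetD g e.1 (PySem.List.pyGetD g e.1 [] ++ [e.2])
  PySem.List.pySetD g1 e.2 (PySem.List.pyGetD g1 e.2 [] ++ [e.1])

-- def root(x): while boss[x] != x: x = boss[x]; return x
def pvRoot : Nat → List Int → Int → Int
  | 0, _, a => a
  | g+1, boss, a =>
    let b := PySem.List.pyGetD boss a 0
    if b ≠ a then pvRoot g boss b else a

-- def compress(x, r): while boss[x] != x: boss[x], x = r, boss[x]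
def pvCompress : Nat → List Int → Int → Int → List Int
  | 0, boss, _, _ => boss
  | g+1, boss, a, r =>
    let b := PySem.List.pyGetD boss a 0
    if b ≠ a then pvCompress g (PySem.List.pySetD boss a r) b r else boss

-- body of Source B's edge loop (state: boss, cs, ce, is_cycle)
def pvStep1B (gas : Nat) (st : List Int × Int × Int × List Bool) (e : Int × Int) :
    List Int × Int × Int × List Bool :=
  let ru := pvRoot gas st.1 e.1
  let b1 := pvCompress gas st.1 e.1 ru
  let rv := pvRoot gas b1 e.2
  let b2 := pvCompress gas b1 e.2 rv
  if ru ≠ rv then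
    (PySem.List.pySetD b2 (max ru rv) (min ru rv), st.2.1, st.2.2.1, st.2.2.2)
  else
    (PySem.List.pySetD (PySem.List.pySetD b2 e.1 0) e.2 0, min e.1 e.2, max e.1 e.2,
     PySem.List.pySetD (PySem.List.pySetD st.2.2.2 (min e.1 e.2) true) (max e.1 e.2) true)

-- B's backtrack: while u2 != cs: is_cycle[u2] = True; u2 = pred[u2]
def pvWalkB (cs : Int) : Nat → Int → List Int → List Bool → List Bool
  | 0, _, _, mark => mark
  | gas+1, u2, pr, mark =>
    if u2 = cs then mark
    else pvWalkB cs gas (PySem.List.pyGetD pr u2 0) pr (PySem.List.pySetD mark u2 true)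

-- B's inner `for w in adj[v]` of the predecessor BFS
def pvInnerB (ce cs : Int) (wf : Nat) (cur : Int) :
    List Int → List Int → List Int → List Int → List Bool →
    List Int × List Int × List Int × List Bool
  | [], out, pr, seen, mark => (out, pr, seen, mark)
  | w :: ws, out, pr, seen, mark =>
    if PySem.List.pyGetD seen w 0 = 0 then
      pvInnerB ce cs wf cur ws (out ++ [w]) (PySem.List.pySetD pr w cur)
        (PySem.List.pySetD seen w 1) mark
    else if w = ce then
      if cur = cs then pvInnerB ce cs wf cur ws out pr seen mark   -- continue
      else (out, pr, seen, pvWalkB cs wf cur pr mark)              -- backtrack, break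
    else pvInnerB ce cs wf cur ws out pr seen mark

-- B's `while bfs: v = bfs.popleft(); …`
def pvBfsB (adj : List (List Int)) (ce cs : Int) (wf : Nat) :
    Nat → List Int → List Int → List Int → List Bool → List Bool
  | 0, _, _, _, mark => mark
  | gas+1, q, pr, seen, mark =>
    match q with
    | [] => mark
    | cur :: tl =>
      let r := pvInnerB ce cs wf cur (PySem.List.pyGetD adj cur []) [] pr seen mark
      pvBfsB adj ce cs wf gas (tl ++ r.1) r.2.1 r.2.2.1 r.2.2.2

-- B's spreading pass: left-ended deque used as a stack (popleft / appendleft)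
def pvLoopD (adj : List (List Int)) : Nat → List Int → List Int → List Int
  | 0, _, dist => dist
  | gas+1, stk, dist =>
    match stk with
    | [] => dist
    | cur :: tl =>
      let r := (PySem.List.pyGetD adj cur []).foldl
        (fun (sd : List Int × List Int) w =>
          if PySem.List.pyGetD sd.2 w 0 = -1 then
            (w :: sd.1, PySem.List.pySetD sd.2 w (PySem.List.pyGetD sd.2 cur 0 + 1))
          else sd) (tl, dist)
      pvLoopD adj gas r.1 r.2

def solve_alt (n : Int) (edges : List (Int × Int)) : List Int :=
  let sz := (n+1).toNat
  let gas := sz + 2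
  let wf := 2 * sz + 2
  let adj := edges.foldl pvLinkB (List.replicate sz ([] : List Int))
  let st := edges.foldl (pvStep1B gas) (PySem.List.pyRange 0 (n+1) 1, 0, 0, List.replicate sz false)
  let cs := st.2.1
  let ce := st.2.2.1
  let seen := PySem.List.pySetD (PySem.List.pySetD (List.replicate sz (0:Int)) cs 1) ce 1
  let pred := List.replicate sz (0:Int)
  let mark := pvBfsB adj ce cs wf gas [cs] pred seen st.2.2.2
  let dist0 := (-1) ::
    ((PySem.List.pyRange 1 (n+1) 1).map (fun v => if PySem.List.pyGetD mark v false = true then (0:Int) else -1))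
  let stack0 := (PySem.List.pyRange n 0 (-1)).filter (fun v => PySem.List.pyGetD mark v false)
  let dist := pvLoopD adj (2 * sz + 2) stack0 dist0
  PySem.List.slice dist (some 1) none

-- ===== PRECONDITION & SPEC =====
-- Pre_ is exactly where A returns normally: A raises IndexError when n < 0 or a
-- vertex id lies outside [-(n+1), n] (negative ids index the same lists by
-- Python's wraparound, and both programs treat them alike).
def Pre_solve (n : Int) (edges : List (Int × Int)) : Prop :=
  0 ≤ n ∧ ∀ p ∈ edges, -(n+1) ≤ p.1 ∧ p.1 ≤ n ∧ -(n+1) ≤ p.2 ∧ p.2 ≤ n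
instance (n : Int) (edges : List (Int × Int)) : Decidable (Pre_solve n edges) := by
  unfold Pre_solve; infer_instance

def pvWitness_solve : Int × (List (Int × Int)) := (4, [(1, 2), (2, 3), (3, 1), (3, 4)])

def Spec_solve (n : Int) (edges : List (Int × Int)) (out : List Int) : Prop := out = solve_alt n edges
instance (n : Int) (edges : List (Int × Int)) (out : List Int) : Decidable (Spec_solve n edges out) := by
  unfold Spec_solve; infer_instance

-- ===== CLAIM (what is proved, stated in full; the proofs are below) =====
def Claim_equal_solve : Prop := ∀ (n : Int) (edges : List (Int × Int)), Dom_solve n edges → Pre_solve n edges → Spec_solve n edges (solve n edges)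

-- ===== LEMMAS AND PROOFS =====

def pvOfCharsRep (G : List Char → Option Nat) (s : List Char) : Option Int :=
  match (List.dropWhile PySem.Int.isIntSpace (List.dropWhile PySem.Int.isIntSpace s).reverse).reverse with
  | '-' :: ds => Option.map (fun n => -n) (do let a ← G ds; pure ((a:Int)))
  | '+' :: ds => Option.map (fun n => n) (do let a ← G ds; pure ((a:Int)))
  | ds => Option.map (fun n => n) (do let a ← G ds; pure ((a:Int)))

def pvDigitsRep (g : List Char → Bool → Nat → Option Nat) : List Char → Option Nat :=
  fun cs => match cs with | [] => none | x => g x false 0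

theorem pvCap : ∃ (g : List Char → Bool → Nat → Option Nat),
    PySem.Int.ofChars? = pvOfCharsRep (pvDigitsRep g) ∧
    (∀ b acc, g [] b acc = if b then some acc else none) ∧
    (∀ c rest b acc, g (c::rest) b acc =
      if c.isDigit then g rest true (acc*10 + (c.toNat - '0'.toNat))
      else if c = '_' ∧ b = true then
        (match rest with | d :: _ => if d.isDigit then g rest false acc else none | [] => none)
      else none) := by
  refine ⟨_, rfl, ?_, ?_⟩
  · exact fun b acc => rfl
  · exact fun c rest b acc => rfl

-- decimal digit list of n, most significant first
def pvRep (n : Nat) : List Char :=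
  if n < 10 then [Nat.digitChar n] else pvRep (n / 10) ++ [Nat.digitChar (n % 10)]
  decreasing_by exact Nat.div_lt_self (by omega) (by omega)

lemma pvDigitChar_isDigit {k : Nat} (h : k < 10) : (Nat.digitChar k).isDigit = true := by
  interval_cases k <;> decide

lemma pvDigitChar_val {k : Nat} (h : k < 10) : (Nat.digitChar k).toNat - 48 = k := by
  interval_cases k <;> decide

lemma pvRep_ne_nil (n : Nat) : pvRep n ≠ [] := by
  rw [pvRep]; split <;> simp

lemma pvRep_digits (n : Nat) : ∀ c ∈ pvRep n, c.isDigit = true := by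
  induction n using Nat.strong_induction_on with
  | _ n ih =>
    rw [pvRep]
    split
    · intro c hc; simp at hc; subst hc; exact pvDigitChar_isDigit (by omega)
    · intro c hc
      rcases List.mem_append.1 hc with h | h
      · exact ih (n / 10) (Nat.div_lt_self (by omega) (by omega)) c h
      · simp at h; subst h; exact pvDigitChar_isDigit (Nat.mod_lt _ (by omega))

lemma pvToDigitsCore_eq (f : Nat) : ∀ n acc, n < f →
    Nat.toDigitsCore 10 f n acc = pvRep n ++ acc := by
  induction f with
  | zero => omega
  | succ f ih =>
    intro n acc h
    rw [Nat.toDigitsCore]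
    by_cases h10 : n < 10
    · have : n / 10 = 0 := Nat.div_eq_of_lt h10
      simp only [this]
      rw [pvRep, if_pos h10, Nat.mod_eq_of_lt h10]
      simp
    · have hne : n / 10 ≠ 0 := by omega
      simp only [if_neg hne]
      rw [ih (n / 10) _ (by omega)]
      conv_rhs => rw [pvRep]
      rw [if_neg h10]
      simp
lemma pvToDigits_eq (n : Nat) : Nat.toDigits 10 n = pvRep n := by
  have := pvToDigitsCore_eq (n+1) n [] (by omega)
  simpa [Nat.toDigits] using this

lemma pvRep_val (n : Nat) : ∀ acc, (pvRep n).foldl (fun a c => a*10 + (c.toNat - 48)) acc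
    = acc * 10 ^ (pvRep n).length + n := by
  induction n using Nat.strong_induction_on with
  | _ n ih =>
    intro acc
    rw [pvRep]
    split
    · rename_i h
      simp [pvDigitChar_val h]
    · rename_i h
      rw [List.foldl_append, ih (n / 10) (Nat.div_lt_self (by omega) (by omega)) acc]
      simp only [List.foldl_cons, List.foldl_nil, List.length_append, List.length_singleton,
        pvDigitChar_val (Nat.mod_lt n (by omega : (0:Nat) < 10)), pow_succ]
      have := Nat.div_add_mod n 10
      nlinarith [this]

lemma pvDigit_not_intspace {c : Char} (h : c.isDigit = true) : PySem.Int.isIntSpace c = false := by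
  simp only [Char.isDigit] at h
  simp only [PySem.Int.isIntSpace]
  have h1 : 48 ≤ c.toNat := by simpa using (decide_eq_true_iff.mp (Bool.and_elim_left h))
  have h2 : c.toNat ≤ 57 := by simpa using (decide_eq_true_iff.mp (Bool.and_elim_right h))
  simp only [Bool.or_eq_false_iff, decide_eq_false_iff_not]
  refine ⟨⟨⟨⟨⟨?_, ?_⟩, ?_⟩, ?_⟩, ?_⟩, ?_⟩ <;> intro hc <;>
    apply absurd (congrArg Char.toNat hc) <;> simp <;> omega

lemma pvDropWhile_digits (l : List Char) (h : ∀ c ∈ l, c.isDigit = true) :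
    List.dropWhile PySem.Int.isIntSpace l = l := by
  cases l with
  | nil => rfl
  | cons c cs =>
    rw [List.dropWhile_cons_of_neg]
    simp [pvDigit_not_intspace (h c (by simp))]

lemma pvParse_digits (l : List Char) (hne : l ≠ []) (h : ∀ c ∈ l, c.isDigit = true) :
    PySem.Int.ofChars? l = some ((l.foldl (fun a c => a*10 + (c.toNat - 48)) 0 : Nat) : Int) := by
  obtain ⟨g, hrep, h0, h1⟩ := pvCap
  rw [hrep]
  have hgd : ∀ (ds : List Char) (acc : Nat), (∀ c ∈ ds, c.isDigit = true) →
      g ds true acc = some (ds.foldl (fun a c => a*10 + (c.toNat - 48)) acc) := by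
    intro ds
    induction ds with
    | nil => intro acc _; simp [h0]
    | cons c cs ih =>
      intro acc hd
      rw [h1, if_pos (hd c (by simp))]
      exact ih _ (fun x hx => hd x (by simp [hx]))
  unfold pvOfCharsRep
  have hrev : ∀ c ∈ l.reverse, c.isDigit = true := by simpa using h
  rw [pvDropWhile_digits l h, pvDropWhile_digits l.reverse hrev, List.reverse_reverse]
  obtain ⟨c, cs, rfl⟩ := List.exists_cons_of_ne_nil hne
  have hc := h c (by simp)
  have hcm : c ≠ '-' := by rintro rfl; simp at hc
  have hcp : c ≠ '+' := by rintro rfl; simp at hc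
  split
  · rename_i heq; rw [List.cons.injEq] at heq; exact absurd heq.1 hcm
  · rename_i heq; rw [List.cons.injEq] at heq; exact absurd heq.1 hcp
  · simp only [pvDigitsRep]
    rw [h1, if_pos hc, hgd cs _ (fun x hx => h x (by simp [hx]))]
    simp

lemma pvDash_not_intspace : PySem.Int.isIntSpace '-' = false := by decide

lemma pvParse_neg_digits (l : List Char) (hne : l ≠ []) (h : ∀ c ∈ l, c.isDigit = true) :
    PySem.Int.ofChars? ('-' :: l)
      = some (-((l.foldl (fun a c => a*10 + (c.toNat - 48)) 0 : Nat) : Int)) := by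
  obtain ⟨g, hrep, h0, h1⟩ := pvCap
  rw [hrep]
  have hgd : ∀ (ds : List Char) (acc : Nat), (∀ c ∈ ds, c.isDigit = true) →
      g ds true acc = some (ds.foldl (fun a c => a*10 + (c.toNat - 48)) acc) := by
    intro ds
    induction ds with
    | nil => intro acc _; simp [h0]
    | cons c cs ih =>
      intro acc hd
      rw [h1, if_pos (hd c (by simp))]
      exact ih _ (fun x hx => hd x (by simp [hx]))
  unfold pvOfCharsRep
  rw [List.dropWhile_cons_of_neg (by simp [pvDash_not_intspace])]
  obtain ⟨c, cs, hrev⟩ := List.exists_cons_of_ne_nil (show l.reverse ≠ [] by simpa using hne)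
  have hcdig : c.isDigit = true := h c (by rw [← List.mem_reverse, hrev]; simp)
  rw [show ('-' :: l).reverse = l.reverse ++ ['-'] by simp, hrev, List.cons_append,
    List.dropWhile_cons_of_neg (by simp [pvDigit_not_intspace hcdig]),
    show (c :: (cs ++ ['-'])).reverse = '-' :: (c :: cs).reverse by simp, ← hrev,
    List.reverse_reverse]
  simp only [pvDigitsRep]
  obtain ⟨a, as, rfl⟩ := List.exists_cons_of_ne_nil hne
  rw [h1, if_pos (h a (by simp)), hgd as _ (fun x hx => h x (by simp [hx]))]
  simp

lemma pvParse_toChars (x : Int) (hx : 0 ≤ x) :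
    PySem.Int.ofChars? (PySem.Int.toChars x) = some x := by
  rw [PySem.Int.toChars, if_neg (by omega), pvToDigits_eq]
  rw [pvParse_digits _ (pvRep_ne_nil _) (pvRep_digits _)]
  rw [pvRep_val x.toNat 0]
  simp [hx]

lemma pvParse_toChars_all (x : Int) :
    PySem.Int.ofChars? (PySem.Int.toChars x) = some x := by
  by_cases hx : 0 ≤ x
  · exact pvParse_toChars x hx
  · rw [PySem.Int.toChars, if_pos (by omega), pvToDigits_eq]
    rw [pvParse_neg_digits _ (pvRep_ne_nil _) (pvRep_digits _)]
    rw [pvRep_val x.natAbs 0]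
    have hx' : ((x.natAbs : Nat) : Int) = -x := Int.ofNat_natAbs_of_nonpos (by omega)
    simp [hx']

def pvRender : List Int → List Char
  | [] => []
  | [a] => PySem.Int.toChars a
  | a :: rest => PySem.Int.toChars a ++ ' ' :: pvRender rest


lemma go_nil (cur : List Char) (acc : List (List Char)) : PySem.Chars.split₀.go [] cur acc =
    if cur.isEmpty then acc.reverse else (cur.reverse :: acc).reverse := by
  simp [PySem.Chars.split₀.go]

lemma go_cons_space (rest cur : List Char) (acc : List (List Char)) : PySem.Chars.split₀.go (' ' :: rest) cur acc =
    if cur.isEmpty then PySem.Chars.split₀.go rest [] acc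
    else PySem.Chars.split₀.go rest [] (cur.reverse :: acc) := by
  rw [PySem.Chars.split₀.go]
  have hs : PySem.Chars.isspace ' ' = true := by decide
  simp [hs]

lemma go_cons_nonspace {c : Char} (h : PySem.Chars.isspace c = false) (rest cur : List Char) (acc : List (List Char)) :
    PySem.Chars.split₀.go (c :: rest) cur acc = PySem.Chars.split₀.go rest (c :: cur) acc := by
  rw [PySem.Chars.split₀.go]
  simp [h]

lemma go_token (t : List Char) (h : ∀ c ∈ t, PySem.Chars.isspace c = false) :
    ∀ (rest cur : List Char) (acc : List (List Char)),
    PySem.Chars.split₀.go (t ++ rest) cur acc = PySem.Chars.split₀.go rest (t.reverse ++ cur) acc := by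
  induction t with
  | nil => intro rest cur acc; simp
  | cons c cs ih =>
    intro rest cur acc
    rw [List.cons_append, go_cons_nonspace (h c (by simp)) _ _ _,
      ih (fun x hx => h x (by simp [hx])) rest (c :: cur) acc]
    simp

lemma go_render (l : List Int) (h : ∀ x ∈ l, PySem.Int.toChars x ≠ [] ∧
      ∀ c ∈ PySem.Int.toChars x, PySem.Chars.isspace c = false) (hl : l ≠ []) :
    ∀ (cur : List Char) (acc : List (List Char)),
    PySem.Chars.split₀.go (pvRender l) cur acc =
      acc.reverse ++ (cur.reverse ++ PySem.Int.toChars (l.headI)) :: (l.tail.map PySem.Int.toChars) := by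
  induction l with
  | nil => exact absurd rfl hl
  | cons a rest ih =>
    intro cur acc
    match rest with
    | [] =>
      show PySem.Chars.split₀.go (pvRender [a]) cur acc = _
      rw [show pvRender [a] = PySem.Int.toChars a from rfl]
      rw [show PySem.Int.toChars a = PySem.Int.toChars a ++ [] from (List.append_nil _).symm,
        go_token _ (h a (by simp)).2 [] cur acc, go_nil]
      have : ((PySem.Int.toChars a).reverse ++ cur).isEmpty = false := by
        simp [List.isEmpty_iff, (h a (by simp)).1]
      simp [this]
    | b :: rest' =>
      rw [show pvRender (a :: b :: rest') = PySem.Int.toChars a ++ ' ' :: pvRender (b :: rest') from rfl]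
      rw [go_token _ (h a (by simp)).2 _ cur acc, go_cons_space]
      have : ((PySem.Int.toChars a).reverse ++ cur).isEmpty = false := by
        simp [List.isEmpty_iff, (h a (by simp)).1]
      rw [if_neg (by simp [this])]
      rw [ih (fun x hx => h x (by simp [hx])) (by simp) [] _]
      simp

lemma split₀_render (l : List Int) (h : ∀ x ∈ l, PySem.Int.toChars x ≠ [] ∧
      ∀ c ∈ PySem.Int.toChars x, PySem.Chars.isspace c = false) :
    PySem.Chars.split₀ (pvRender l) = l.map PySem.Int.toChars := by
  match l with
  | [] => rfl
  | a :: rest =>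
    show PySem.Chars.split₀.go _ [] [] = _
    rw [go_render _ h (by simp) [] []]
    simp


lemma pvDigit_not_isspace {c : Char} (h : c.isDigit = true) : PySem.Chars.isspace c = false := by
  simp only [Char.isDigit] at h
  have h1 : 48 ≤ c.toNat := by simpa using (decide_eq_true_iff.mp (Bool.and_elim_left h))
  have h2 : c.toNat ≤ 57 := by simpa using (decide_eq_true_iff.mp (Bool.and_elim_right h))
  simp only [PySem.Chars.isspace]
  simp only [Bool.or_eq_false_iff, Bool.and_eq_false_iff, decide_eq_false_iff_not]
  omega

lemma pvTokOK (x : Int) : PySem.Int.toChars x ≠ [] ∧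
    ∀ c ∈ PySem.Int.toChars x, PySem.Chars.isspace c = false := by
  rw [PySem.Int.toChars]
  split
  · refine ⟨by simp, ?_⟩
    intro c hc
    rcases List.mem_cons.1 hc with h | h
    · rw [h]; decide
    · rw [pvToDigits_eq] at h
      exact pvDigit_not_isspace (pvRep_digits _ c h)
  · rw [pvToDigits_eq]
    exact ⟨pvRep_ne_nil _, fun c hc => pvDigit_not_isspace (pvRep_digits _ c hc)⟩

lemma pvDecode_render (l : List Int) :
    (PySem.Chars.split₀ (pvRender l)).map (fun t => (PySem.Int.ofChars? t).getD 0) = l := by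
  rw [split₀_render _ (fun x _ => pvTokOK x), List.map_map]
  conv_rhs => rw [show l = l.map id from (List.map_id l).symm]
  apply List.map_congr_left
  intro x _
  simp [pvParse_toChars_all x]

lemma pvRender_snoc (l : List Int) (hl : l ≠ []) (x : Int) :
    pvRender (l ++ [x]) = pvRender l ++ ' ' :: PySem.Int.toChars x := by
  induction l with
  | nil => exact absurd rfl hl
  | cons a rest ih =>
    match rest with
    | [] => rfl
    | b :: rest2 =>
      show pvRender (a :: ((b :: rest2) ++ [x])) = _
      rw [show pvRender (a :: ((b :: rest2) ++ [x])) =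
          PySem.Int.toChars a ++ ' ' :: pvRender ((b :: rest2) ++ [x]) from rfl,
        ih (by simp)]
      simp [pvRender]



inductive pvWalkRel (pre : List Int) (cs : Int) : Int → List Int → Prop
  | nil : pvWalkRel pre cs cs []
  | cons {v : Int} {L : List Int} : v ≠ cs → pvWalkRel pre cs (PySem.List.pyGetD pre v 0) L →
      pvWalkRel pre cs v (L ++ [v])

lemma pvGetD_setD {α : Type} (l : List α) (i j : Int) (a d : α)
    (h0i : 0 ≤ i) (hi : i < (l.length : Int)) (h0j : 0 ≤ j) (hj : j < (l.length : Int)) :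
    PySem.List.pyGetD (PySem.List.pySetD l i a) j d = if j = i then a else PySem.List.pyGetD l j d := by
  rw [PySem.List.pySetD_of_nonneg l a h0i,
    PySem.List.pyGetD_eq_getElem (l.set i.toNat a) d h0j (by simpa using hj),
    List.getElem_set]
  split
  · rename_i hji
    rw [if_pos (by omega)]
  · rename_i hji
    rw [if_neg (by omega), PySem.List.pyGetD_eq_getElem l d h0j hj]


-- ===== Python index wraparound: slot arithmetic =====

-- the slot a (possibly negative, in-range) Python index denotes
def pvT (L : Nat) (i : Int) : Int := if i < 0 then i + L else i

lemma pvT_nonneg (L : Nat) (i : Int) (h : 0 ≤ i) : pvT L i = i := by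
  unfold pvT; rw [if_neg (by omega)]

lemma pvT_bounds (L : Nat) (i : Int) (h1 : -(L:Int) ≤ i) (h2 : i < (L:Int)) :
    0 ≤ pvT L i ∧ pvT L i < (L:Int) := by
  unfold pvT; split <;> omega

lemma pvIdx_eq (L : Nat) (i : Int) (h1 : -(L:Int) ≤ i) (h2 : i < (L:Int)) :
    PySem.List.pyIdx? L i = some (pvT L i).toNat := by
  unfold PySem.List.pyIdx? pvT
  by_cases h : 0 ≤ i
  · rw [if_pos h, if_pos h2, if_neg (by omega)]
  · rw [if_neg h, if_pos (by omega), if_pos (by omega)]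
    congr 1
    omega

lemma pvGetD_T (α : Type) (l : List α) (i : Int) (d : α)
    (h1 : -(l.length:Int) ≤ i) (h2 : i < (l.length:Int)) :
    PySem.List.pyGetD l i d = PySem.List.pyGetD l (pvT l.length i) d := by
  obtain ⟨ht0, htl⟩ := pvT_bounds l.length i h1 h2
  unfold PySem.List.pyGetD PySem.List.pyGet?
  rw [pvIdx_eq l.length i h1 h2, pvIdx_eq l.length (pvT l.length i) (by omega) htl,
    pvT_nonneg l.length (pvT l.length i) ht0]

lemma pvSetD_T (α : Type) (l : List α) (i : Int) (v : α)
    (h1 : -(l.length:Int) ≤ i) (h2 : i < (l.length:Int)) :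
    PySem.List.pySetD l i v = PySem.List.pySetD l (pvT l.length i) v := by
  obtain ⟨ht0, htl⟩ := pvT_bounds l.length i h1 h2
  unfold PySem.List.pySetD PySem.List.pySet?
  rw [pvIdx_eq l.length i h1 h2, pvIdx_eq l.length (pvT l.length i) (by omega) htl,
    pvT_nonneg l.length (pvT l.length i) ht0]

-- wrap-aware read-after-write
lemma pvGetD_setD' {α : Type} (l : List α) (i j : Int) (a d : α)
    (hi1 : -(l.length:Int) ≤ i) (hi2 : i < (l.length:Int))
    (hj1 : -(l.length:Int) ≤ j) (hj2 : j < (l.length:Int)) :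
    PySem.List.pyGetD (PySem.List.pySetD l i a) j d
      = if pvT l.length j = pvT l.length i then a else PySem.List.pyGetD l j d := by
  obtain ⟨hti0, htil⟩ := pvT_bounds l.length i hi1 hi2
  obtain ⟨htj0, htjl⟩ := pvT_bounds l.length j hj1 hj2
  rw [pvSetD_T α l i a hi1 hi2,
    pvGetD_T α (PySem.List.pySetD l (pvT l.length i) a) j d
      (by rw [PySem.List.length_pySetD]; omega) (by rw [PySem.List.length_pySetD]; omega),
    show (PySem.List.pySetD l (pvT l.length i) a).length = l.length from PySem.List.length_pySetD .. ,
    pvGetD_setD l (pvT l.length i) (pvT l.length j) a d hti0 htil htj0 htjl]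
  split
  · rfl
  · exact (pvGetD_T α l j d hj1 hj2).symm

-- equal reads force distinct slots
lemma pvSlot_ne {α : Type} (l : List α) (x y : Int) (d : α)
    (hx1 : -(l.length:Int) ≤ x) (hx2 : x < (l.length:Int))
    (hy1 : -(l.length:Int) ≤ y) (hy2 : y < (l.length:Int))
    (h : PySem.List.pyGetD l x d ≠ PySem.List.pyGetD l y d) :
    pvT l.length x ≠ pvT l.length y := by
  intro he
  exact h (by rw [pvGetD_T α l x d hx1 hx2, pvGetD_T α l y d hy1 hy2, he])

-- pySetD as its index lookup
lemma pvSetD_idx {α : Type} (l : List α) (i : Int) (v : α) :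
    PySem.List.pySetD l i v
      = match PySem.List.pyIdx? l.length i with
        | none => l
        | some k => l.set k v := by
  unfold PySem.List.pySetD PySem.List.pySet?
  cases PySem.List.pyIdx? l.length i <;> simp

-- writing `true` twice commutes at ANY pair of Python indices
lemma pvSetD_comm_true (l : List Bool) (i j : Int) :
    PySem.List.pySetD (PySem.List.pySetD l i true) j true
      = PySem.List.pySetD (PySem.List.pySetD l j true) i true := by
  have hlen : ∀ (m : List Bool) (x : Int), (PySem.List.pySetD m x true).length = m.length :=
    fun m x => PySem.List.length_pySetD ..
  rw [pvSetD_idx l i true, pvSetD_idx l j true]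
  cases hi : PySem.List.pyIdx? l.length i with
  | none =>
    cases hj : PySem.List.pyIdx? l.length j with
    | none => simp [pvSetD_idx, List.length_set, hi, hj]
    | some kj => simp [pvSetD_idx, List.length_set, hi, hj]
  | some ki =>
    cases hj : PySem.List.pyIdx? l.length j with
    | none => simp [pvSetD_idx, List.length_set, hi, hj]
    | some kj =>
      simp only [pvSetD_idx, List.length_set, hi, hj]
      by_cases hk : ki = kj
      · rw [hk, List.set_set]
      · exact List.set_comm _ _ (by omega)

-- negative in-range index = the same op at index + length
lemma pvGetD_shift {α : Type} (l : List α) (i : Int) (d : α)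
    (h1 : -(l.length:Int) ≤ i) (h2 : i < 0) :
    PySem.List.pyGetD l i d = PySem.List.pyGetD l (i + l.length) d := by
  rw [pvGetD_T α l i d h1 (by have := l.length; omega)]
  unfold pvT
  rw [if_pos h2]

lemma pvSetD_shift {α : Type} (l : List α) (i : Int) (v : α)
    (h1 : -(l.length:Int) ≤ i) (h2 : i < 0) :
    PySem.List.pySetD l i v = PySem.List.pySetD l (i + l.length) v := by
  rw [pvSetD_T α l i v h1 (by have := l.length; omega)]
  unfold pvT
  rw [if_pos h2]

lemma pvWalkRel_stable {pre pre' : List Int} {cs : Int} {v : Int} {L : List Int}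
    (hw : pvWalkRel pre cs v L) (hagree : ∀ x ∈ L, PySem.List.pyGetD pre' x 0 = PySem.List.pyGetD pre x 0) :
    pvWalkRel pre' cs v L := by
  induction hw with
  | nil => exact pvWalkRel.nil
  | cons hne _ ih =>
    rename_i v L _
    refine pvWalkRel.cons hne ?_
    rw [hagree v (by simp)]
    exact ih (fun x hx => hagree x (by simp [hx]))

lemma pvWalkRel_nil_iff {pre : List Int} {cs v : Int} {L : List Int} (h : pvWalkRel pre cs v L) :
    (L = [] ↔ v = cs) := by
  cases h with
  | nil => simp
  | cons hne _ => simp [hne]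

lemma pvWalk_spec {pre : List Int} {cs : Int} : ∀ {v : Int} {L : List Int}, pvWalkRel pre cs v L →
    ∀ (fuel : Nat), L.length < fuel → ∀ (isc : List Bool),
    pvWalkB cs fuel v pre isc = L.reverse.foldl (fun a cv => PySem.List.pySetD a cv true) isc := by
  intro v L h
  induction h with
  | nil =>
    intro fuel hf isc
    match fuel, hf with
    | f+1, _ => simp [pvWalkB]
  | cons hne hw ih =>
    rename_i v L
    intro fuel hf isc
    match fuel, hf with
    | f+1, hf =>
      rw [pvWalkB, if_neg hne, ih f (by simp at hf; omega)]
      simp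

lemma pvFoldl_set_out (L : List Int) (isc : List Bool) (x : Int) :
    L.foldl (fun a cv => PySem.List.pySetD a cv true) (PySem.List.pySetD isc x true)
      = PySem.List.pySetD (L.foldl (fun a cv => PySem.List.pySetD a cv true) isc) x true := by
  induction L generalizing isc with
  | nil => rfl
  | cons y L ih =>
    simp only [List.foldl_cons]
    rw [pvSetD_comm_true isc x y]
    exact ih _

lemma pvFoldl_set_rev (L : List Int) (isc : List Bool) :
    L.reverse.foldl (fun a cv => PySem.List.pySetD a cv true) isc
      = L.foldl (fun a cv => PySem.List.pySetD a cv true) isc := by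
  induction L generalizing isc with
  | nil => rfl
  | cons y L ih =>
    simp only [List.reverse_cons, List.foldl_append, List.foldl_cons, List.foldl_nil]
    rw [ih isc, pvFoldl_set_out L isc y]

def pvRel (n cs : Int) (pre visited : List Int) (b : Int) (a : Int × List Char) : Prop :=
  ∃ L : List Int, a.1 = b ∧ a.2 = pvRender (cs :: L) ∧ pvWalkRel pre cs b L ∧ L.Nodup ∧
    (∀ x ∈ L, -(n+1) ≤ x ∧ x ≤ n ∧ PySem.List.pyGetD visited x 0 ≠ 0) ∧ -(n+1) ≤ b ∧ b ≤ n

lemma pvRel_stable {n cs : Int} {pre pre' visited visited' : List Int} {b : Int} {a : Int × List Char}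
    (hstab : ∀ x, -(n+1) ≤ x → x ≤ n → PySem.List.pyGetD visited x 0 ≠ 0 →
      PySem.List.pyGetD pre' x 0 = PySem.List.pyGetD pre x 0)
    (hmono : ∀ x, -(n+1) ≤ x → x ≤ n → PySem.List.pyGetD visited x 0 ≠ 0 → PySem.List.pyGetD visited' x 0 ≠ 0)
    (h : pvRel n cs pre visited b a) : pvRel n cs pre' visited' b a := by
  obtain ⟨L, h1, h2, h3, h4, h5, h6⟩ := h
  exact ⟨L, h1, h2,
    pvWalkRel_stable h3 (fun x hx => hstab x (h5 x hx).1 (h5 x hx).2.1 (h5 x hx).2.2),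
    h4, fun x hx => ⟨(h5 x hx).1, (h5 x hx).2.1, hmono x (h5 x hx).1 (h5 x hx).2.1 (h5 x hx).2.2⟩, h6⟩

lemma pvForall₂_append {α β : Type} {R : α → β → Prop} {l₁ l₂ : List α} {m₁ m₂ : List β}
    (h1 : List.Forall₂ R l₁ m₁) (h2 : List.Forall₂ R l₂ m₂) :
    List.Forall₂ R (l₁ ++ l₂) (m₁ ++ m₂) := by
  induction h1 with
  | nil => exact h2
  | cons h _ ih => exact List.Forall₂.cons h ih

lemma pvInner_eq (n cs ce : Int) (hn : 0 ≤ n) (hcs0 : -(n+1) ≤ cs) (hcsn : cs ≤ n)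
    (wf : Nat) (hwf : ∀ L : List Int, L.Nodup → (∀ x ∈ L, -(n+1) ≤ x ∧ x ≤ n) → L.length < wf)
    (v : Int) (path : List Char) (Lv : List Int) :
    ∀ (nvs : List Int) (accA : List (Int × List Char)) (accB : List Int)
      (pre visited : List Int) (isc : List Bool),
    (∀ x ∈ nvs, -(n+1) ≤ x ∧ x ≤ n) →
    visited.length = (n+1).toNat → pre.length = (n+1).toNat →
    PySem.List.pyGetD visited cs 0 ≠ 0 →
    (path = pvRender (cs :: Lv) ∧ pvWalkRel pre cs v Lv ∧ Lv.Nodup ∧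
      (∀ x ∈ Lv, -(n+1) ≤ x ∧ x ≤ n ∧ PySem.List.pyGetD visited x 0 ≠ 0) ∧ -(n+1) ≤ v ∧ v ≤ n) →
    List.Forall₂ (pvRel n cs pre visited) accB accA →
    (pvInnerA ce path nvs accA visited isc).2.1 = (pvInnerB ce cs wf v nvs accB pre visited isc).2.2.1 ∧
    (pvInnerA ce path nvs accA visited isc).2.2 = (pvInnerB ce cs wf v nvs accB pre visited isc).2.2.2 ∧
    List.Forall₂ (pvRel n cs (pvInnerB ce cs wf v nvs accB pre visited isc).2.1
        (pvInnerA ce path nvs accA visited isc).2.1)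
      (pvInnerB ce cs wf v nvs accB pre visited isc).1 (pvInnerA ce path nvs accA visited isc).1 ∧
    (pvInnerA ce path nvs accA visited isc).2.1.length = (n+1).toNat ∧
    (pvInnerB ce cs wf v nvs accB pre visited isc).2.1.length = (n+1).toNat ∧
    (∀ x, -(n+1) ≤ x → x ≤ n → PySem.List.pyGetD visited x 0 ≠ 0 →
      PySem.List.pyGetD (pvInnerA ce path nvs accA visited isc).2.1 x 0 ≠ 0) ∧
    (∀ x, -(n+1) ≤ x → x ≤ n → PySem.List.pyGetD visited x 0 ≠ 0 →
      PySem.List.pyGetD (pvInnerB ce cs wf v nvs accB pre visited isc).2.1 x 0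
        = PySem.List.pyGetD pre x 0) := by
  intro nvs
  induction nvs with
  | nil =>
    intro accA accB pre visited isc _ hvlen hplen _ _ hacc
    exact ⟨rfl, rfl, hacc, hvlen, hplen, fun x _ _ h => h, fun x _ _ _ => rfl⟩
  | cons nv nvs ih =>
    intro accA accB pre visited isc hb hvlen hplen hcsv hrelv hacc
    obtain ⟨hpath, hwalk, hnd, hLv, hv0, hvn⟩ := hrelv
    have hnv0 := (hb nv (by simp)).1
    have hnvn := (hb nv (by simp)).2
    have hvl : (visited.length : Int) = n + 1 := by rw [hvlen]; omega
    have hpl : (pre.length : Int) = n + 1 := by rw [hplen]; omega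
    rw [pvInnerA, pvInnerB]
    by_cases hunv : PySem.List.pyGetD visited nv 0 = 0
    · rw [if_pos hunv, if_pos hunv]
      have hSne : ∀ x, -(n+1) ≤ x → x ≤ n → PySem.List.pyGetD visited x 0 ≠ 0 →
          pvT (n+1).toNat x ≠ pvT (n+1).toNat nv := by
        intro x hx0 hxn hx
        have h2 := pvSlot_ne visited x nv 0 (by omega) (by omega) (by omega) (by omega)
          (by rw [hunv]; exact hx)
        rwa [hvlen] at h2
      have hstab : ∀ x, -(n+1) ≤ x → x ≤ n → PySem.List.pyGetD visited x 0 ≠ 0 →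
          PySem.List.pyGetD (PySem.List.pySetD pre nv v) x 0 = PySem.List.pyGetD pre x 0 := by
        intro x hx0 hxn hx
        rw [pvGetD_setD' pre nv x v 0 (by omega) (by omega) (by omega) (by omega),
          if_neg (by rw [hplen]; exact hSne x hx0 hxn hx)]
      have hmono : ∀ x, -(n+1) ≤ x → x ≤ n → PySem.List.pyGetD visited x 0 ≠ 0 →
          PySem.List.pyGetD (PySem.List.pySetD visited nv 1) x 0 ≠ 0 := by
        intro x hx0 hxn hx
        rw [pvGetD_setD' visited nv x 1 0 (by omega) (by omega) (by omega) (by omega)]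
        split
        · omega
        · exact hx
      have hnvnecs : nv ≠ cs := by intro h; rw [h] at hunv; exact hcsv hunv
      have hnvnotinL : nv ∉ Lv := by
        intro h; exact (hLv nv h).2.2 hunv
      have hrendernew : path ++ ' ' :: PySem.Int.toChars nv = pvRender (cs :: (Lv ++ [nv])) := by
        rw [show (cs :: (Lv ++ [nv])) = (cs :: Lv) ++ [nv] from by simp,
          pvRender_snoc (cs :: Lv) (by simp) nv, hpath]
      have hwalknew : pvWalkRel (PySem.List.pySetD pre nv v) cs nv (Lv ++ [nv]) := by
        refine pvWalkRel.cons hnvnecs ?_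
        rw [pvGetD_setD' pre nv nv v 0 (by omega) (by omega) (by omega) (by omega), if_pos rfl]
        exact pvWalkRel_stable hwalk (fun x hx => hstab x (hLv x hx).1 (hLv x hx).2.1 (hLv x hx).2.2)
      have hndnew : (Lv ++ [nv]).Nodup := by
        rw [List.nodup_append]
        exact ⟨hnd, List.nodup_singleton _, by simp [List.Disjoint, hnvnotinL]; intro a ha h; rw [h] at ha; exact hnvnotinL ha⟩
      have hLnew : ∀ x ∈ Lv ++ [nv], -(n+1) ≤ x ∧ x ≤ n ∧
          PySem.List.pyGetD (PySem.List.pySetD visited nv 1) x 0 ≠ 0 := by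
        intro x hx
        rcases List.mem_append.1 hx with h | h
        · exact ⟨(hLv x h).1, (hLv x h).2.1, hmono x (hLv x h).1 (hLv x h).2.1 (hLv x h).2.2⟩
        · simp only [List.mem_singleton] at h
          rw [h]
          refine ⟨hnv0, hnvn, ?_⟩
          rw [pvGetD_setD' visited nv nv 1 0 (by omega) (by omega) (by omega) (by omega),
            if_pos rfl]
          omega
      have hacc2 : List.Forall₂ (pvRel n cs (PySem.List.pySetD pre nv v) (PySem.List.pySetD visited nv 1))
          (accB ++ [nv]) (accA ++ [(nv, path ++ ' ' :: PySem.Int.toChars nv)]) := by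
        refine pvForall₂_append (List.Forall₂.imp (fun b a h => pvRel_stable hstab hmono h) hacc) ?_
        exact List.Forall₂.cons ⟨Lv ++ [nv], rfl, hrendernew, hwalknew, hndnew, hLnew, hnv0, hnvn⟩ List.Forall₂.nil
      have hrelv2 : path = pvRender (cs :: Lv) ∧ pvWalkRel (PySem.List.pySetD pre nv v) cs v Lv ∧ Lv.Nodup ∧
          (∀ x ∈ Lv, -(n+1) ≤ x ∧ x ≤ n ∧ PySem.List.pyGetD (PySem.List.pySetD visited nv 1) x 0 ≠ 0) ∧
          -(n+1) ≤ v ∧ v ≤ n := by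
        refine ⟨hpath, pvWalkRel_stable hwalk (fun x hx => hstab x (hLv x hx).1 (hLv x hx).2.1 (hLv x hx).2.2),
          hnd, fun x hx => ⟨(hLv x hx).1, (hLv x hx).2.1, hmono x (hLv x hx).1 (hLv x hx).2.1 (hLv x hx).2.2⟩,
          hv0, hvn⟩
      obtain ⟨e1, e2, e3, e4, e5, e6, e7⟩ := ih (accA ++ [(nv, path ++ ' ' :: PySem.Int.toChars nv)])
        (accB ++ [nv]) (PySem.List.pySetD pre nv v) (PySem.List.pySetD visited nv 1) isc
        (fun x hx => hb x (by simp [hx]))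
        (by simp [hvlen]) (by simp [hplen])
        (hmono cs hcs0 hcsn hcsv) hrelv2 hacc2
      refine ⟨e1, e2, e3, e4, e5, ?_, ?_⟩
      · intro x hx0 hxn hx
        exact e6 x hx0 hxn (hmono x hx0 hxn hx)
      · intro x hx0 hxn hx
        rw [e7 x hx0 hxn (hmono x hx0 hxn hx), hstab x hx0 hxn hx]
    · rw [if_neg hunv, if_neg hunv]
      by_cases hce : nv = ce
      · rw [if_pos hce, if_pos hce]
        have hdec : ((PySem.Chars.split₀ path).drop 1).map (fun t => (PySem.Int.ofChars? t).getD 0) = Lv := by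
          rw [hpath, List.map_drop, pvDecode_render (cs :: Lv)]
          simp
        by_cases hvcs : v = cs
        · have hLnil : Lv = [] := (pvWalkRel_nil_iff hwalk).2 hvcs
          rw [if_pos (by rw [hdec, hLnil]), if_pos hvcs]
          exact ih accA accB pre visited isc (fun x hx => hb x (by simp [hx])) hvlen hplen hcsv
            ⟨hpath, hwalk, hnd, hLv, hv0, hvn⟩ hacc
        · have hLne : Lv ≠ [] := fun h => hvcs ((pvWalkRel_nil_iff hwalk).1 h)
          rw [if_neg (by rw [hdec]; exact hLne), if_neg hvcs]
          refine ⟨rfl, ?_, hacc, hvlen, hplen, fun x _ _ h => h, fun x _ _ _ => rfl⟩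
          rw [hdec, pvWalk_spec hwalk wf (hwf Lv hnd (fun x hx => ⟨(hLv x hx).1, (hLv x hx).2.1⟩)) isc,
            pvFoldl_set_rev Lv isc]
      · rw [if_neg hce, if_neg hce]
        exact ih accA accB pre visited isc (fun x hx => hb x (by simp [hx])) hvlen hplen hcsv
          ⟨hpath, hwalk, hnd, hLv, hv0, hvn⟩ hacc

lemma pvBfs_eq (n cs ce : Int) (hn : 0 ≤ n) (hcs0 : -(n+1) ≤ cs) (hcsn : cs ≤ n)
    (graph : List (List Int)) (HG : ∀ (v : Int), ∀ x ∈ PySem.List.pyGetD graph v [], -(n+1) ≤ x ∧ x ≤ n)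
    (wf : Nat) (hwf : ∀ L : List Int, L.Nodup → (∀ x ∈ L, -(n+1) ≤ x ∧ x ≤ n) → L.length < wf) :
    ∀ (fuel : Nat) (queA : List (Int × List Char)) (queB : List Int)
      (pre visited : List Int) (isc : List Bool),
    visited.length = (n+1).toNat → pre.length = (n+1).toNat →
    PySem.List.pyGetD visited cs 0 ≠ 0 →
    List.Forall₂ (pvRel n cs pre visited) queB queA →
    pvBfsA graph ce fuel queA visited isc = pvBfsB graph ce cs wf fuel queB pre visited isc := by
  intro fuel
  induction fuel with
  | zero => intro queA queB pre visited isc _ _ _ _; rfl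
  | succ fuel ih =>
    intro queA queB pre visited isc hvlen hplen hcsv hque
    cases hque with
    | nil => rfl
    | @cons b a queB' queA' hrel hque' =>
      obtain ⟨Lv, ha1, ha2, hwalk, hnd, hLv, hb0, hbn⟩ := hrel
      obtain ⟨v, path⟩ := a
      simp only at ha1 ha2
      subst ha1
      rw [pvBfsA, pvBfsB]
      obtain ⟨e1, e2, e3, e4, e5, e6, e7⟩ := pvInner_eq n cs ce hn hcs0 hcsn wf hwf v path Lv
        (PySem.List.pyGetD graph v []) [] [] pre visited isc
        (HG v) hvlen hplen hcsv ⟨ha2, hwalk, hnd, hLv, hb0, hbn⟩ List.Forall₂.nil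
      rw [e1, e2]
      refine ih _ _ _ _ _ (e1 ▸ e4) e5 ?_ ?_
      · exact e1 ▸ e6 cs hcs0 hcsn hcsv
      · refine pvForall₂_append ?_ (e1 ▸ e3)
        refine List.Forall₂.imp (fun b' a' h => ?_) hque'
        refine pvRel_stable (fun x hx0 hxn hx => e7 x hx0 hxn hx) (fun x hx0 hxn hx => e1 ▸ e6 x hx0 hxn hx) h

-- size bound used to feed the backtrack fuel
lemma pvNodupBound (n : Int) (hn : 0 ≤ n) (L : List Int) (hnd : L.Nodup)
    (hb : ∀ x ∈ L, -(n+1) ≤ x ∧ x ≤ n) : L.length < 2 * (n+1).toNat + 2 := by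
  have hsub : L.toFinset ⊆ Finset.Icc (-(n+1)) n := by
    intro x hx
    rw [List.mem_toFinset] at hx
    rw [Finset.mem_Icc]
    exact hb x hx
  have := Finset.card_le_card hsub
  rw [List.toFinset_card_of_nodup hnd, Int.card_Icc] at this
  omega

-- every member list of the graph only holds edge endpoints
lemma pvAdj_mem {g : List (List Int)} {i x : Int} {l : List Int}
    (hl : l ∈ pvAdj g i x) : l ∈ g ∨ l = PySem.List.pyGetD g i [] ++ [x] := by
  unfold pvAdj PySem.List.pySetD at hl
  cases hset : PySem.List.pySet? g i (PySem.List.pyGetD g i [] ++ [x]) with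
  | none => rw [hset] at hl; exact Or.inl hl
  | some g2 =>
    rw [hset] at hl
    simp only [Option.getD_some] at hl
    unfold PySem.List.pySet? at hset
    cases hidx : PySem.List.pyIdx? g.length i with
    | none => rw [hidx] at hset; simp at hset
    | some k =>
      rw [hidx] at hset
      simp only [Option.map_some] at hset
      rw [← Option.some_inj.1 hset] at hl
      exact List.mem_or_eq_of_mem_set hl

lemma pvBuildGraph_mem (P : Int → Prop) : ∀ (es : List (Int × Int)) (g : List (List Int)),
    (∀ p ∈ es, P p.1 ∧ P p.2) → (∀ l ∈ g, ∀ x ∈ l, P x) →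
    ∀ l ∈ pvBuildGraph es g, ∀ x ∈ l, P x := by
  intro es
  induction es with
  | nil => intro g _ hg; exact hg
  | cons p es ih =>
    obtain ⟨u, v⟩ := p
    intro g hes hg
    refine ih _ (fun q hq => hes q (by simp [hq])) ?_
    intro l hl x hx
    have hu : P u := (hes (u, v) (by simp)).1
    have hv : P v := (hes (u, v) (by simp)).2
    have hixg : ∀ (g' : List (List Int)) (i y : Int), P y → (∀ l' ∈ g', ∀ z ∈ l', P z) →
        ∀ l' ∈ pvAdj g' i y, ∀ z ∈ l', P z := by
      intro g i y hy hgood l' hl' z hz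
      rcases pvAdj_mem hl' with h | h
      · exact hgood l' h z hz
      · rw [h] at hz
        rcases List.mem_append.1 hz with h2 | h2
        · by_cases hrange : ∃ w, PySem.List.pyGet? g i = some w
          · obtain ⟨w, hw⟩ := hrange
            have : PySem.List.pyGetD g i ([] : List Int) = w := by
              rw [PySem.List.pyGetD, hw]; rfl
            rw [this] at h2
            exact hgood w (PySem.List.mem_of_pyGet?_eq_some g hw) z h2
          · have : PySem.List.pyGet? g i = none := by
              cases hh : PySem.List.pyGet? g i
              · rfl
              · exact absurd ⟨_, hh⟩ hrange
            rw [PySem.List.pyGetD_of_none g i [] this] at h2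
            simp at h2
        · simp at h2; rw [h2]; exact hy
    exact hixg _ v u hu (hixg _ u v hv hg) l hl x hx

-- graph lookups only produce endpoints
lemma pvGetD_graph_bound (P : Int → Prop) (g : List (List Int)) (hg : ∀ l ∈ g, ∀ x ∈ l, P x) :
    ∀ (v : Int), ∀ x ∈ PySem.List.pyGetD g v [], P x := by
  intro v x hx
  cases hh : PySem.List.pyGet? g v with
  | none => rw [PySem.List.pyGetD_of_none g v [] hh] at hx; simp at hx
  | some l =>
    have : PySem.List.pyGetD g v ([] : List Int) = l := by rw [PySem.List.pyGetD, hh]; rfl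
    rw [this] at hx
    exact hg l (PySem.List.mem_of_pyGet?_eq_some g hh) x hx

lemma pvRngLen (n : Int) (hn : 0 ≤ n) : (PySem.List.pyRange 0 (n+1) 1).length = (n+1).toNat := by
  rw [PySem.List.length_pyRange_one]
  omega

-- ===== phase 1: recursive compressing find = root walk + pointer rewrite =====

-- value/index ordering invariant of the parent array (up to index x)
def pvInvLe (p : List Int) (x : Int) : Prop :=
  ∀ j : Int, 0 ≤ j → j ≤ x → j < (p.length : Int) →
    0 ≤ PySem.List.pyGetD p j 0 ∧ PySem.List.pyGetD p j 0 ≤ j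

def pvInv (p : List Int) : Prop :=
  ∀ j : Int, 0 ≤ j → j < (p.length : Int) →
    0 ≤ PySem.List.pyGetD p j 0 ∧ PySem.List.pyGetD p j 0 ≤ j

lemma pvInv_le {p : List Int} (h : pvInv p) (x : Int) : pvInvLe p x :=
  fun j h0 _ hl => h j h0 hl

lemma pvSetD_comm_ne {α : Type} (l : List α) (i j : Int) (a b : α)
    (h0i : 0 ≤ i) (h0j : 0 ≤ j) (hne : i ≠ j) :
    PySem.List.pySetD (PySem.List.pySetD l i a) j b
      = PySem.List.pySetD (PySem.List.pySetD l j b) i a := by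
  rw [PySem.List.pySetD_of_nonneg l a h0i, PySem.List.pySetD_of_nonneg _ b h0j,
    PySem.List.pySetD_of_nonneg l b h0j, PySem.List.pySetD_of_nonneg _ a h0i]
  exact List.set_comm _ _ (by omega)

lemma pvCompress_length : ∀ (F : Nat) (p : List Int) (x r : Int),
    (pvCompress F p x r).length = p.length := by
  intro F
  induction F with
  | zero => intro p x r; rfl
  | succ F ih =>
    intro p x r
    rw [pvCompress]
    split
    · rw [ih, PySem.List.length_pySetD]
    · rfl

lemma pvFind_length : ∀ (F : Nat) (p : List Int) (x : Int),
    ((pvFind F p x).1).length = p.length := by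
  intro F
  induction F with
  | zero => intro p x; rfl
  | succ F ih =>
    intro p x
    rw [pvFind]
    split
    · simp only [PySem.List.length_pySetD, ih]
    · rfl

lemma pvInv_setD {p : List Int} (hp : pvInv p) {i a : Int}
    (h0i : 0 ≤ i) (hil : i < (p.length : Int)) (h0a : 0 ≤ a) (hai : a ≤ i) :
    pvInv (PySem.List.pySetD p i a) := by
  intro j h0j hjl
  rw [PySem.List.length_pySetD] at hjl
  rw [pvGetD_setD p i j a 0 h0i hil h0j hjl]
  split
  · rename_i hji; subst hji; exact ⟨h0a, hai⟩
  · exact hp j h0j hjl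

-- compress commutes with updating a strictly higher index
lemma pvCompress_setD_high : ∀ (F : Nat) (p : List Int) (y i a r : Int),
    pvInvLe p y → 0 ≤ y → y < (p.length : Int) → 0 ≤ i → i < (p.length : Int) → y < i →
    pvCompress F (PySem.List.pySetD p i a) y r
      = PySem.List.pySetD (pvCompress F p y r) i a := by
  intro F
  induction F with
  | zero => intro p y i a r _ _ _ _ _ _; rfl
  | succ F ih =>
    intro p y i a r hinv h0y hyl h0i hil hyi
    have hby : PySem.List.pyGetD (PySem.List.pySetD p i a) y 0 = PySem.List.pyGetD p y 0 := by
      rw [pvGetD_setD p i y a 0 h0i hil h0y hyl, if_neg (by omega)]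
    rw [pvCompress, pvCompress]
    simp only [hby]
    by_cases hb : PySem.List.pyGetD p y 0 ≠ y
    · rw [if_pos hb, if_pos hb]
      obtain ⟨hb0, hble⟩ := hinv y h0y le_rfl hyl
      set py := PySem.List.pyGetD p y 0 with hpy
      have hpylt : py < y := lt_of_le_of_ne hble hb
      rw [pvSetD_comm_ne p i y a r (by omega) h0y (by omega)]
      rw [ih (PySem.List.pySetD p y r) py i a r ?_ hb0
        (by rw [PySem.List.length_pySetD]; omega) (by omega)
        (by rw [PySem.List.length_pySetD]; omega) (by omega)]
      intro j h0j hjle hjl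
      rw [PySem.List.length_pySetD] at hjl
      rw [pvGetD_setD p y j r 0 h0y hyl h0j hjl, if_neg (by omega)]
      exact hinv j h0j (by omega) hjl
    · rw [if_neg hb, if_neg hb]

-- the compressing recursive find IS root-walk + pointer rewrite
lemma pvFind_eq_rootCompress : ∀ (F : Nat) (p : List Int) (x : Int),
    pvInvLe p x → 0 ≤ x → x < (p.length : Int) → x.toNat + 2 ≤ F →
    pvFind F p x = (pvCompress F p x (pvRoot F p x), pvRoot F p x) := by
  intro F
  induction F with
  | zero => intro p x _ _ _ hf; omega
  | succ F ih =>
    intro p x hinv h0x hxl hf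
    rw [pvFind, pvRoot, pvCompress]
    by_cases hb : PySem.List.pyGetD p x 0 ≠ x
    · simp only [if_pos hb]
      obtain ⟨hb0, hble⟩ := hinv x h0x le_rfl hxl
      set px := PySem.List.pyGetD p x 0 with hpx
      have hpxlt : px < x := lt_of_le_of_ne hble hb
      have hrec := ih p px (fun j h0j hjle hjl => hinv j h0j (by omega) hjl) hb0
        (by omega) (by omega)
      rw [hrec]
      simp only
      rw [pvCompress_setD_high F p px x (pvRoot F p px) (pvRoot F p px)
        (fun j h0j hjle hjl => hinv j h0j (by omega) hjl) hb0 (by omega) h0x hxl hpxlt]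
    · simp only [if_neg hb]
      simp only [ne_eq, not_not] at hb
      rw [hb]

-- find preserves the invariant; its root is in [0, x]
lemma pvFind_inv : ∀ (F : Nat) (p : List Int) (x : Int),
    pvInv p → 0 ≤ x → x < (p.length : Int) →
    pvInv (pvFind F p x).1 ∧ 0 ≤ (pvFind F p x).2 ∧ (pvFind F p x).2 ≤ x := by
  intro F
  induction F with
  | zero =>
    intro p x hinv h0x hxl
    exact ⟨hinv, (hinv x h0x hxl).1, (hinv x h0x hxl).2⟩
  | succ F ih =>
    intro p x hinv h0x hxl
    rw [pvFind]
    by_cases hb : PySem.List.pyGetD p x 0 ≠ x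
    · simp only [if_pos hb]
      obtain ⟨hb0, hble⟩ := hinv x h0x hxl
      set px := PySem.List.pyGetD p x 0 with hpx
      have hpxlt : px < x := lt_of_le_of_ne hble hb
      obtain ⟨hinv', hr0, hrle⟩ := ih p px hinv hb0 (by omega)
      have hlen : ((pvFind F p px).1.length : Int) = (p.length : Int) := by
        rw [pvFind_length]
      refine ⟨?_, hr0, by omega⟩
      exact pvInv_setD hinv' h0x (by omega) hr0 (by omega)
    · simp only [if_neg hb]
      exact ⟨hinv, (hinv x h0x hxl).1, (hinv x h0x hxl).2⟩

-- the returned root is a fixpoint of the returned array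
lemma pvFind_fix : ∀ (F : Nat) (p : List Int) (x : Int),
    pvInv p → 0 ≤ x → x < (p.length : Int) → x.toNat + 2 ≤ F →
    PySem.List.pyGetD (pvFind F p x).1 (pvFind F p x).2 0 = (pvFind F p x).2 := by
  intro F
  induction F with
  | zero => intro p x _ _ _ hf; omega
  | succ F ih =>
    intro p x hinv h0x hxl hf
    rw [pvFind]
    by_cases hb : PySem.List.pyGetD p x 0 ≠ x
    · simp only [if_pos hb]
      obtain ⟨hb0, hble⟩ := hinv x h0x hxl
      set px := PySem.List.pyGetD p x 0 with hpx
      have hpxlt : px < x := lt_of_le_of_ne hble hb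
      obtain ⟨hinv', hr0, hrle⟩ := pvFind_inv F p px hinv hb0 (by omega)
      have hfix := ih p px hinv hb0 (by omega) (by omega)
      have hlen : ((pvFind F p px).1.length : Int) = (p.length : Int) := by
        rw [pvFind_length]
      rw [pvGetD_setD (pvFind F p px).1 x (pvFind F p px).2 (pvFind F p px).2 0
        h0x (by omega) hr0 (by omega), if_neg (by omega)]
      exact hfix
    · simp only [if_neg hb]
      simp only [ne_eq, not_not] at hb
      rw [hb]
      exact hb

-- find keeps other fixpoints fixed
lemma pvFind_keepfix : ∀ (F : Nat) (p : List Int) (x z : Int),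
    pvInv p → 0 ≤ x → x < (p.length : Int) → 0 ≤ z → z < (p.length : Int) →
    PySem.List.pyGetD p z 0 = z →
    PySem.List.pyGetD (pvFind F p x).1 z 0 = z := by
  intro F
  induction F with
  | zero => intro p x z _ _ _ _ _ hz; exact hz
  | succ F ih =>
    intro p x z hinv h0x hxl h0z hzl hz
    rw [pvFind]
    by_cases hb : PySem.List.pyGetD p x 0 ≠ x
    · simp only [if_pos hb]
      have hxz : x ≠ z := by intro h; exact hb (by rw [h]; exact hz)
      obtain ⟨hb0, hble⟩ := hinv x h0x hxl
      set px := PySem.List.pyGetD p x 0 with hpx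
      have hpxlt : px < x := lt_of_le_of_ne hble hb
      have hlen : ((pvFind F p px).1.length : Int) = (p.length : Int) := by
        rw [pvFind_length]
      rw [pvGetD_setD (pvFind F p px).1 x z (pvFind F p px).2 0 h0x (by omega) h0z (by omega),
        if_neg (by omega)]
      exact ih p px z hinv hb0 (by omega) h0z hzl hz
    · simp only [if_neg hb]; exact hz

-- fixpoints are inert
lemma pvRoot_fixpoint (F : Nat) (p : List Int) (y : Int)
    (hy : PySem.List.pyGetD p y 0 = y) : pvRoot F p y = y := by
  cases F with
  | zero => rfl
  | succ F => rw [pvRoot]; simp [hy]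

lemma pvFind_fixpoint_id (F : Nat) (p : List Int) (y : Int)
    (hy : PySem.List.pyGetD p y 0 = y) : pvFind F p y = (p, y) := by
  cases F with
  | zero => simp [pvFind, hy]
  | succ F => rw [pvFind]; simp [hy]

lemma pvCompress_fixpoint_id (F : Nat) (p : List Int) (y r : Int)
    (hy : PySem.List.pyGetD p y 0 = y) : pvCompress F p y r = p := by
  cases F with
  | zero => rfl
  | succ F => rw [pvCompress]; simp [hy]

lemma pvInv_setD' {p : List Int} (hp : pvInv p) {i a : Int}
    (h1 : -(p.length:Int) ≤ i) (h2 : i < (p.length:Int)) (h0a : 0 ≤ a)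
    (hai : a ≤ pvT p.length i) : pvInv (PySem.List.pySetD p i a) := by
  rw [pvSetD_T Int p i a h1 h2]
  obtain ⟨ht0, htl⟩ := pvT_bounds p.length i h1 h2
  exact pvInv_setD hp ht0 htl h0a hai

-- the wraparound wrappers: one unfolding step lands in the nonnegative world
lemma pvFindW_eq (F : Nat) (p : List Int) (x : Int)
    (hinv : pvInv p) (h1 : -(p.length:Int) ≤ x) (h2 : x < (p.length:Int))
    (hf : p.length + 2 ≤ F) :
    pvFind F p x = (pvCompress F p x (pvRoot F p x), pvRoot F p x) := by
  by_cases hx : 0 ≤ x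
  · exact pvFind_eq_rootCompress F p x (pvInv_le hinv x) hx h2 (by omega)
  · match F, hf with
    | F+1, hf =>
      rw [pvFind, pvRoot, pvCompress]
      have hsh := pvGetD_shift p x (0:Int) h1 (by omega)
      set px := PySem.List.pyGetD p x 0 with hpxd
      have hpxb := hinv (x + p.length) (by omega) (by omega)
      rw [← hsh] at hpxb
      have hne : px ≠ x := by omega
      simp only [if_pos hne]
      have hrec := pvFind_eq_rootCompress F p px (pvInv_le hinv px) (by omega) (by omega) (by omega)
      rw [hrec]
      by_cases hfix : px = x + p.length
      · have hfixp : PySem.List.pyGetD p px 0 = px := by rw [hfix, ← hsh]; exact hfix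
        rw [pvRoot_fixpoint F p px hfixp, pvCompress_fixpoint_id F p px px hfixp]
        have hBfix : PySem.List.pyGetD (PySem.List.pySetD p x px) px 0 = px := by
          rw [pvSetD_shift p x px h1 (by omega),
            pvGetD_setD p (x + p.length) px px 0 (by omega) (by omega) (by omega) (by omega),
            if_pos hfix]
        rw [pvCompress_fixpoint_id F (PySem.List.pySetD p x px) px px hBfix]
      · have hlt : px < x + p.length := by omega
        have hshift2 : PySem.List.pySetD (pvCompress F p px (pvRoot F p px)) x (pvRoot F p px)
            = PySem.List.pySetD (pvCompress F p px (pvRoot F p px)) (x + (p.length:Int)) (pvRoot F p px) := by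
          have h := pvSetD_shift (pvCompress F p px (pvRoot F p px)) x (pvRoot F p px)
            (by rw [pvCompress_length]; exact h1) (by omega)
          rwa [pvCompress_length] at h
        rw [pvSetD_shift p x (pvRoot F p px) h1 (by omega),
          pvCompress_setD_high F p px (x + p.length) (pvRoot F p px) (pvRoot F p px)
            (pvInv_le hinv px) (by omega) (by omega) (by omega) (by omega) hlt,
          ← hshift2]

lemma pvFind_invW (F : Nat) (p : List Int) (x : Int)
    (hinv : pvInv p) (h1 : -(p.length:Int) ≤ x) (h2 : x < (p.length:Int)) :
    pvInv (pvFind F p x).1 ∧ 0 ≤ (pvFind F p x).2 ∧ (pvFind F p x).2 ≤ pvT p.length x := by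
  by_cases hx : 0 ≤ x
  · rw [pvT_nonneg _ _ hx]
    exact pvFind_inv F p x hinv hx h2
  · have hT : pvT p.length x = x + p.length := by unfold pvT; rw [if_pos (by omega)]
    have hsh := pvGetD_shift p x (0:Int) h1 (by omega)
    have hpxb := hinv (x + p.length) (by omega) (by omega)
    rw [← hsh] at hpxb
    cases F with
    | zero => exact ⟨hinv, hpxb.1, by rw [hT]; exact hpxb.2⟩
    | succ F =>
      rw [pvFind]
      have hne : PySem.List.pyGetD p x 0 ≠ x := by omega
      simp only [if_pos hne]
      obtain ⟨hinv', hr0, hrle⟩ := pvFind_inv F p (PySem.List.pyGetD p x 0) hinv (by omega) (by omega)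
      have hql : (pvFind F p (PySem.List.pyGetD p x 0)).1.length = p.length := pvFind_length ..
      refine ⟨?_, hr0, ?_⟩
      · refine pvInv_setD' hinv' (by rw [hql]; exact h1) (by rw [hql]; omega) hr0 ?_
        rw [show pvT (pvFind F p (PySem.List.pyGetD p x 0)).1.length x = pvT p.length x by rw [hql], hT]
        omega
      · show (pvFind F p (PySem.List.pyGetD p x 0)).2 ≤ pvT p.length x
        rw [hT]
        omega

lemma pvFind_fixW (F : Nat) (p : List Int) (x : Int)
    (hinv : pvInv p) (h1 : -(p.length:Int) ≤ x) (h2 : x < (p.length:Int))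
    (hf : p.length + 2 ≤ F) :
    PySem.List.pyGetD (pvFind F p x).1 (pvFind F p x).2 0 = (pvFind F p x).2 := by
  by_cases hx : 0 ≤ x
  · exact pvFind_fix F p x hinv hx h2 (by omega)
  · match F, hf with
    | F+1, hf =>
      rw [pvFind]
      have hsh := pvGetD_shift p x (0:Int) h1 (by omega)
      have hpxb := hinv (x + p.length) (by omega) (by omega)
      rw [← hsh] at hpxb
      have hne : PySem.List.pyGetD p x 0 ≠ x := by omega
      simp only [if_pos hne]
      set px := PySem.List.pyGetD p x 0 with hpxd
      obtain ⟨hinv', hr0, hrle⟩ := pvFind_inv F p px hinv (by omega) (by omega)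
      have hql : (pvFind F p px).1.length = p.length := pvFind_length ..
      have hshq : PySem.List.pySetD (pvFind F p px).1 x (pvFind F p px).2
          = PySem.List.pySetD (pvFind F p px).1 (x + (p.length:Int)) (pvFind F p px).2 := by
        have h := pvSetD_shift (pvFind F p px).1 x (pvFind F p px).2
          (by rw [hql]; exact h1) (by omega)
        rwa [hql] at h
      rw [hshq,
        pvGetD_setD (pvFind F p px).1 (x + (p.length:Int)) (pvFind F p px).2 (pvFind F p px).2 0
          (by omega) (by rw [hql]; omega) (by omega) (by rw [hql]; omega)]
      split
      · rfl
      · exact pvFind_fix F p px hinv (by omega) (by omega) (by omega)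

lemma pvFind_keepfixW (F : Nat) (p : List Int) (x z : Int)
    (hinv : pvInv p) (h1 : -(p.length:Int) ≤ x) (h2 : x < (p.length:Int))
    (h0z : 0 ≤ z) (hzl : z < (p.length:Int)) (hz : PySem.List.pyGetD p z 0 = z) :
    PySem.List.pyGetD (pvFind F p x).1 z 0 = z := by
  by_cases hx : 0 ≤ x
  · exact pvFind_keepfix F p x z hinv hx h2 h0z hzl hz
  · cases F with
    | zero => exact hz
    | succ F =>
      rw [pvFind]
      have hsh := pvGetD_shift p x (0:Int) h1 (by omega)
      have hpxb := hinv (x + p.length) (by omega) (by omega)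
      rw [← hsh] at hpxb
      have hne : PySem.List.pyGetD p x 0 ≠ x := by omega
      simp only [if_pos hne]
      set px := PySem.List.pyGetD p x 0 with hpxd
      by_cases hzx : z = x + p.length
      · have hpxz : px = z := by rw [hsh, ← hzx]; exact hz
        rw [hpxz, pvFind_fixpoint_id F p z hz]
        rw [pvSetD_shift p x z h1 (by omega),
          pvGetD_setD p (x + p.length) z z 0 (by omega) (by omega) h0z hzl, if_pos hzx]
      · have hql : (pvFind F p px).1.length = p.length := pvFind_length ..
        have hshq : PySem.List.pySetD (pvFind F p px).1 x (pvFind F p px).2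
            = PySem.List.pySetD (pvFind F p px).1 (x + (p.length:Int)) (pvFind F p px).2 := by
          have h := pvSetD_shift (pvFind F p px).1 x (pvFind F p px).2
            (by rw [hql]; exact h1) (by omega)
          rwa [hql] at h
        rw [hshq,
          pvGetD_setD (pvFind F p px).1 (x + (p.length:Int)) z (pvFind F p px).2 0
            (by omega) (by rw [hql]; omega) h0z (by rw [hql]; exact hzl),
          if_neg hzx]
        exact pvFind_keepfix F p px z hinv (by omega) (by omega) h0z hzl hz

-- the dict lookups A's edge loop makes (computed once here)
lemma pvDictMsgSuccess :
    (PySem.Dict.ofList [("msg", (Sum.inl "success" : Sum String Int))]).get? "msg"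
      = some (Sum.inl "success") := by
  simp [PySem.Dict.ofList, PySem.Dict.update, PySem.Dict.insert, PySem.Dict.empty,
    PySem.Dict.contains, PySem.Dict.get?]

lemma pvDictCycle (u v : Int) :
    (PySem.Dict.ofList [("msg", (Sum.inl "cycle" : Sum String Int)), ("start", Sum.inr (min u v)), ("end", Sum.inr (max u v))]).get? "msg"
      = some (Sum.inl "cycle") ∧
    (PySem.Dict.ofList [("msg", (Sum.inl "cycle" : Sum String Int)), ("start", Sum.inr (min u v)), ("end", Sum.inr (max u v))]).get? "start"
      = some (Sum.inr (min u v)) ∧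
    (PySem.Dict.ofList [("msg", (Sum.inl "cycle" : Sum String Int)), ("start", Sum.inr (min u v)), ("end", Sum.inr (max u v))]).get? "end"
      = some (Sum.inr (max u v)) := by
  refine ⟨?_, ?_, ?_⟩ <;>
    simp [PySem.Dict.ofList, PySem.Dict.update, PySem.Dict.insert, PySem.Dict.empty,
      PySem.Dict.contains, PySem.Dict.get?]

-- A's edge loop = foldl of Source B's loop body
lemma pvLoop1_eq : ∀ (es : List (Int × Int)) (fuel : Nat) (parent : List Int)
    (cs ce : Int) (isc : List Bool),
    pvInv parent → parent.length + 2 ≤ fuel →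
    (∀ q ∈ es, -(parent.length:Int) ≤ q.1 ∧ q.1 < (parent.length : Int) ∧
      -(parent.length:Int) ≤ q.2 ∧ q.2 < (parent.length : Int)) →
    pvLoop1A fuel es (parent, cs, ce, isc) = es.foldl (pvStep1B fuel) (parent, cs, ce, isc) := by
  intro es
  induction es with
  | nil => intro fuel parent cs ce isc _ _ _; rfl
  | cons e es ih =>
    obtain ⟨u, v⟩ := e
    intro fuel parent cs ce isc hinv hflen hb
    obtain ⟨hu1, hu2, hv1, hv2⟩ := hb (u, v) (by simp)
    have hr1 := pvFindW_eq fuel parent u hinv hu1 hu2 hflen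
    obtain ⟨hinv1, hru0, hrule⟩ := pvFind_invW fuel parent u hinv hu1 hu2
    have hTu := pvT_bounds parent.length u hu1 hu2
    have hlen1 : (pvFind fuel parent u).1.length = parent.length := pvFind_length ..
    have hr2 := pvFindW_eq fuel (pvFind fuel parent u).1 v hinv1
      (by rw [hlen1]; exact hv1) (by rw [hlen1]; exact hv2) (by rw [hlen1]; exact hflen)
    obtain ⟨hinv2, hrv0, hrvle⟩ := pvFind_invW fuel (pvFind fuel parent u).1 v hinv1
      (by rw [hlen1]; exact hv1) (by rw [hlen1]; exact hv2)
    have hTv := pvT_bounds (pvFind fuel parent u).1.length v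
      (by rw [hlen1]; exact hv1) (by rw [hlen1]; exact hv2)
    have hlen2 : (pvFind fuel (pvFind fuel parent u).1 v).1.length = parent.length := by
      rw [pvFind_length, hlen1]
    have hrulen : (pvFind fuel parent u).2 < (parent.length : Int) := by
      rw [hlen1] at hTv; omega
    have hrvlen : (pvFind fuel (pvFind fuel parent u).1 v).2 < (parent.length : Int) := by
      rw [hlen1] at hTv hrvle; omega
    rw [pvLoop1A, List.foldl_cons]
    unfold pvUnionA pvStep1B
    simp only
    by_cases hpq : (pvFind fuel parent u).2 ≠ (pvFind fuel (pvFind fuel parent u).1 v).2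
    · rw [if_pos hpq]
      have hruB : pvRoot fuel parent u = (pvFind fuel parent u).2 := by rw [hr1]
      have hb1B : pvCompress fuel parent u (pvRoot fuel parent u) = (pvFind fuel parent u).1 := by
        rw [hruB, hr1]
      have hrvB : pvRoot fuel (pvFind fuel parent u).1 v
          = (pvFind fuel (pvFind fuel parent u).1 v).2 := by rw [hr2]
      have hb2B : pvCompress fuel (pvFind fuel parent u).1 v
          (pvRoot fuel (pvFind fuel parent u).1 v) = (pvFind fuel (pvFind fuel parent u).1 v).1 := by
        rw [hrvB, hr2]
      rw [pvDictMsgSuccess]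
      rw [if_neg (by simp)]
      rw [hb1B, hb2B, hruB, hrvB, if_pos hpq]
      set r1 := pvFind fuel parent u
      set r2 := pvFind fuel r1.1 v
      -- the value A reads at min r1.2 r2.2 is min r1.2 r2.2 itself (roots are fixpoints)
      have hfix2 : PySem.List.pyGetD r2.1 r2.2 0 = r2.2 :=
        pvFind_fixW fuel r1.1 v hinv1 (by rw [hlen1]; exact hv1) (by rw [hlen1]; exact hv2)
          (by rw [hlen1]; exact hflen)
      have hfix1 : PySem.List.pyGetD r2.1 r1.2 0 = r1.2 := by
        refine pvFind_keepfixW fuel r1.1 v r1.2 hinv1 (by rw [hlen1]; exact hv1)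
          (by rw [hlen1]; exact hv2) hru0 (by rw [hlen1]; exact hrulen) ?_
        exact pvFind_fixW fuel parent u hinv hu1 hu2 hflen
      have hminfix : PySem.List.pyGetD r2.1 (min r1.2 r2.2) 0 = min r1.2 r2.2 := by
        rcases le_total r1.2 r2.2 with h | h
        · rw [min_eq_left h]; exact hfix1
        · rw [min_eq_right h]; exact hfix2
      rw [hminfix]
      refine ih fuel _ cs ce isc ?_ ?_ ?_
      · refine pvInv_setD hinv2 (le_max_of_le_left hru0) ?_ (le_min hru0 hrv0) (min_le_max)
        rw [hlen2]
        rcases max_cases r1.2 r2.2 with ⟨hm, _⟩ | ⟨hm, _⟩ <;> rw [hm] <;> omega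
      · rw [PySem.List.length_pySetD, hlen2]; exact hflen
      · intro q hq
        have := hb q (by simp [hq])
        simpa [PySem.List.length_pySetD, hlen2] using this
    · rw [if_neg hpq]
      have hruB : pvRoot fuel parent u = (pvFind fuel parent u).2 := by rw [hr1]
      have hb1B : pvCompress fuel parent u (pvRoot fuel parent u) = (pvFind fuel parent u).1 := by
        rw [hruB, hr1]
      have hrvB : pvRoot fuel (pvFind fuel parent u).1 v
          = (pvFind fuel (pvFind fuel parent u).1 v).2 := by rw [hr2]
      have hb2B : pvCompress fuel (pvFind fuel parent u).1 v
          (pvRoot fuel (pvFind fuel parent u).1 v) = (pvFind fuel (pvFind fuel parent u).1 v).1 := by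
        rw [hrvB, hr2]
      obtain ⟨hm, hs, he⟩ := pvDictCycle u v
      rw [hm]
      simp only [hs, he, if_pos rfl]
      rw [hb1B, hb2B, hruB, hrvB, if_neg hpq]
      set r2 := pvFind fuel (pvFind fuel parent u).1 v
      refine ih fuel _ (min u v) (max u v) _ ?_ ?_ ?_
      · have hTu' := pvT_bounds r2.1.length u (by rw [hlen2]; exact hu1) (by rw [hlen2]; exact hu2)
        have h1 : pvInv (PySem.List.pySetD r2.1 u 0) :=
          pvInv_setD' hinv2 (by rw [hlen2]; exact hu1) (by rw [hlen2]; exact hu2) le_rfl (by omega)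
        have hTv' := pvT_bounds (PySem.List.pySetD r2.1 u 0).length v
          (by rw [PySem.List.length_pySetD, hlen2]; exact hv1)
          (by rw [PySem.List.length_pySetD, hlen2]; exact hv2)
        refine pvInv_setD' h1 ?_ ?_ le_rfl (by omega)
        · rw [PySem.List.length_pySetD, hlen2]; exact hv1
        · rw [PySem.List.length_pySetD, hlen2]; exact hv2
      · rw [PySem.List.length_pySetD, PySem.List.length_pySetD, hlen2]; exact hflen
      · intro q hq
        have := hb q (by simp [hq])
        simpa [PySem.List.length_pySetD, hlen2] using this

-- cycle endpoints stay in [-(n+1), n] (B's foldl form)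
lemma pvFold1B_bounds (n : Int) (fuel : Nat) : ∀ (es : List (Int × Int)) (st : List Int × Int × Int × List Bool),
    (∀ p ∈ es, -(n+1) ≤ p.1 ∧ p.1 ≤ n ∧ -(n+1) ≤ p.2 ∧ p.2 ≤ n) →
    -(n+1) ≤ st.2.1 → st.2.1 ≤ n → -(n+1) ≤ st.2.2.1 → st.2.2.1 ≤ n →
    -(n+1) ≤ (es.foldl (pvStep1B fuel) st).2.1 ∧ (es.foldl (pvStep1B fuel) st).2.1 ≤ n ∧
    -(n+1) ≤ (es.foldl (pvStep1B fuel) st).2.2.1 ∧ (es.foldl (pvStep1B fuel) st).2.2.1 ≤ n := by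
  intro es
  induction es with
  | nil => intro st _ h1 h2 h3 h4; exact ⟨h1, h2, h3, h4⟩
  | cons p es ih =>
    obtain ⟨u, v⟩ := p
    intro st hb h1 h2 h3 h4
    have hu := hb (u, v) (by simp)
    rw [List.foldl_cons]
    simp only [pvStep1B]
    split
    · exact ih _ (fun q hq => hb q (by simp [hq])) h1 h2 h3 h4
    · refine ih _ (fun q hq => hb q (by simp [hq])) ?_ ?_ ?_ ?_ <;> simp <;> omega

-- ===== phase 3: left-ended stack = right-popped queue, reversed =====

lemma pvInit3_split (isc : List Bool) : ∀ (vs que : List Int) (d : List Int),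
    pvInit3 isc vs (que, d) = (que ++ vs.filter (fun v => PySem.List.pyGetD isc v false),
      vs.foldl (fun dd v => if PySem.List.pyGetD isc v false = true then PySem.List.pySetD dd v 0 else dd) d) := by
  intro vs
  induction vs with
  | nil => intro que d; simp [pvInit3]
  | cons v vs ih =>
    intro que d
    rw [pvInit3]
    by_cases h : PySem.List.pyGetD isc v false = true
    · rw [if_pos h, ih, List.filter_cons_of_pos (by simpa using h)]
      simp [h]
    · rw [if_neg h, ih, List.filter_cons_of_neg (by simpa using h)]
      simp [h]

lemma pvFoldSet_length (isc : List Bool) : ∀ (vs : List Int) (d : List Int),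
    (vs.foldl (fun dd v => if PySem.List.pyGetD isc v false = true then PySem.List.pySetD dd v 0 else dd) d).length
      = d.length := by
  intro vs
  induction vs with
  | nil => intro d; rfl
  | cons v vs ih =>
    intro d
    rw [List.foldl_cons, ih]
    split <;> simp [PySem.List.length_pySetD]

lemma pvFoldSet_getD (isc : List Bool) : ∀ (vs : List Int) (d : List Int) (j : Int),
    0 ≤ j → j < (d.length : Int) → (∀ v ∈ vs, 0 ≤ v ∧ v < (d.length : Int)) →
    PySem.List.pyGetD
      (vs.foldl (fun dd v => if PySem.List.pyGetD isc v false = true then PySem.List.pySetD dd v 0 else dd) d) j 0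
    = if j ∈ vs ∧ PySem.List.pyGetD isc j false = true then 0 else PySem.List.pyGetD d j 0 := by
  intro vs
  induction vs with
  | nil => intro d j _ _ _; simp
  | cons v vs ih =>
    intro d j h0j hjl hb
    obtain ⟨h0v, hvl⟩ := hb v (by simp)
    have hstep : ((if PySem.List.pyGetD isc v false = true then PySem.List.pySetD d v 0 else d).length : Int)
        = (d.length : Int) := by split <;> simp [PySem.List.length_pySetD]
    rw [List.foldl_cons, ih _ j h0j (by omega) (fun w hw => by
      obtain ⟨a, b⟩ := hb w (by simp [hw]); exact ⟨a, by omega⟩)]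
    by_cases hj : j ∈ vs ∧ PySem.List.pyGetD isc j false = true
    · rw [if_pos hj, if_pos ⟨by simp [hj.1], hj.2⟩]
    · rw [if_neg hj]
      by_cases hv : PySem.List.pyGetD isc v false = true
      · rw [if_pos hv, pvGetD_setD d v j 0 0 h0v hvl h0j hjl]
        by_cases hjv : j = v
        · rw [if_pos hjv, if_pos ⟨by simp [hjv], by rw [hjv]; exact hv⟩]
        · rw [if_neg hjv, if_neg (by
            rintro ⟨hmem, hisc⟩
            rcases List.mem_cons.1 hmem with h | h
            · exact hjv h
            · exact hj ⟨h, hisc⟩)]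
      · rw [if_neg hv, if_neg (by
          rintro ⟨hmem, hisc⟩
          rcases List.mem_cons.1 hmem with h | h
          · rw [h] at hisc; exact hv hisc
          · exact hj ⟨h, hisc⟩)]

-- A's init loop produces exactly Source B's dist comprehension
lemma pvDist0_eq (n : Int) (hn : 0 ≤ n) (isc : List Bool) :
    (PySem.List.pyRange 1 (n+1) 1).foldl
      (fun dd v => if PySem.List.pyGetD isc v false = true then PySem.List.pySetD dd v 0 else dd)
      ((PySem.List.pyRange 0 (n+1) 1).map (fun _ => (-1 : Int)))
    = (-1) :: ((PySem.List.pyRange 1 (n+1) 1).map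
        (fun v => if PySem.List.pyGetD isc v false = true then (0:Int) else -1)) := by
  set base := (PySem.List.pyRange 0 (n+1) 1).map (fun _ => (-1 : Int)) with hbase
  have hblen : base.length = (n+1).toNat := by
    rw [hbase, List.length_map, pvRngLen n hn]
  have hrlen : (PySem.List.pyRange 1 (n+1) 1).length = n.toNat := by
    rw [PySem.List.length_pyRange_one]; omega
  have hmem : ∀ v ∈ PySem.List.pyRange 1 (n+1) 1, 0 ≤ v ∧ v < (base.length : Int) := by
    intro v hv
    rw [PySem.List.mem_pyRange_one] at hv
    constructor
    · omega
    · rw [hblen]; omega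
  apply List.ext_getElem
  · rw [pvFoldSet_length, hblen]
    simp [hrlen]
    omega
  · intro k hk1 hk2
    have hfold := pvFoldSet_getD isc (PySem.List.pyRange 1 (n+1) 1) base (k : Int)
      (by omega) (by rw [hblen]; rw [pvFoldSet_length, hblen] at hk1; push_cast; omega) hmem
    have hbasek : PySem.List.pyGetD base (k : Int) 0 = -1 := by
      rw [hbase]
      refine PySem.List.pyGetD_map_pyRange_of_nonneg _ (n+1) (k:Int) 0 (by omega) ?_
      rw [pvFoldSet_length, hblen] at hk1
      push_cast
      omega
    rw [hbasek] at hfold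
    simp only [PySem.List.pyGetD_natCast] at hfold
    rw [show ((PySem.List.pyRange 1 (n+1) 1).foldl
        (fun dd v => if PySem.List.pyGetD isc v false = true then PySem.List.pySetD dd v 0 else dd) base)[k]
      = ((PySem.List.pyRange 1 (n+1) 1).foldl
        (fun dd v => if PySem.List.pyGetD isc v false = true then PySem.List.pySetD dd v 0 else dd) base).getD k 0
      from (List.getD_eq_getElem _ 0 hk1).symm, hfold]
    rw [show ((-1) :: ((PySem.List.pyRange 1 (n+1) 1).map
        (fun v => if PySem.List.pyGetD isc v false = true then (0:Int) else -1)))[k]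
      = ((-1) :: ((PySem.List.pyRange 1 (n+1) 1).map
        (fun v => if PySem.List.pyGetD isc v false = true then (0:Int) else -1))).getD k 0
      from (List.getD_eq_getElem _ 0 hk2).symm]
    rw [pvFoldSet_length, hblen] at hk1
    cases k with
    | zero =>
      rw [if_neg (by
        rintro ⟨hmem0, _⟩
        rw [PySem.List.mem_pyRange_one] at hmem0
        omega)]
      rfl
    | succ k' =>
      have hk'r : k' < (PySem.List.pyRange 1 (n+1) 1).length := by rw [hrlen]; omega
      rw [List.getD_cons_succ, List.getD_eq_getElem _ 0 (by simpa using hk'r),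
        List.getElem_map, PySem.List.getElem_pyRange_one]
      have hkmem : ((k'+1 : Nat) : Int) ∈ PySem.List.pyRange 1 (n+1) 1 := by
        rw [PySem.List.mem_pyRange_one]; push_cast; omega
      have hcast : (1 : Int) + (k' : Int) = ((k'+1 : Nat) : Int) := by push_cast; omega
      rw [hcast]
      simp only [PySem.List.pyGetD_natCast]
      by_cases hisc : isc.getD (k'+1) false = true
      · rw [if_pos ⟨hkmem, hisc⟩, if_pos hisc]
      · rw [if_neg (by rintro ⟨_, h⟩; exact hisc h), if_neg hisc]

-- Source B's descending stack is A's ascending queue reversed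
lemma pvStack0_eq (n : Int) (p : Int → Bool) :
    (PySem.List.pyRange n 0 (-1)).filter p = ((PySem.List.pyRange 1 (n+1) 1).filter p).reverse := by
  rw [PySem.List.pyRange_neg_one_eq_reverse]
  simp [List.filter_reverse]

-- inner spreading loop: prepend-fold = append-recursion, reversed
lemma pvInnerD_eq (v : Int) : ∀ (adjv : List Int) (que d : List Int),
    adjv.foldl
      (fun (sd : List Int × List Int) w =>
        if PySem.List.pyGetD sd.2 w 0 = -1 then
          (w :: sd.1, PySem.List.pySetD sd.2 w (PySem.List.pyGetD sd.2 v 0 + 1))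
        else sd) (que.reverse, d)
    = ((pvInner3 v adjv que d).1.reverse, (pvInner3 v adjv que d).2) := by
  intro adjv
  induction adjv with
  | nil => intro que d; simp [pvInner3]
  | cons w ws ih =>
    intro que d
    rw [List.foldl_cons, pvInner3]
    by_cases h : PySem.List.pyGetD d w 0 = -1
    · rw [if_pos h]
      simp only [if_pos h]
      rw [show w :: que.reverse = (que ++ [w]).reverse by simp]
      exact ih (que ++ [w]) _
    · rw [if_neg h]
      simp only [if_neg h]
      exact ih que d

lemma pvLoopD_eq (adj : List (List Int)) : ∀ (F : Nat) (s d : List Int),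
    pvLoopD adj F s d = pvLoop3 adj F s.reverse d := by
  intro F
  induction F with
  | zero => intro s d; rfl
  | succ F ih =>
    intro s d
    cases s with
    | nil => rfl
    | cons v rest =>
      rw [pvLoopD]
      simp only [List.reverse_cons]
      rw [pvLoop3]
      simp only [List.getLast?_concat, List.dropLast_concat]
      have hrest : rest = (rest.reverse).reverse := by simp
      conv_lhs => rw [hrest]
      rw [pvInnerD_eq v (PySem.List.pyGetD adj v []) rest.reverse d, ih]
      simp

-- Source B builds the same adjacency structure
lemma pvBuild_eq : ∀ (es : List (Int × Int)) (g : List (List Int)),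
    es.foldl pvLinkB g = pvBuildGraph es g := by
  intro es
  induction es with
  | nil => intro g; rfl
  | cons e es ih =>
    obtain ⟨u, v⟩ := e
    intro g
    rw [List.foldl_cons, pvBuildGraph]
    exact ih _

-- the initial parent array satisfies the invariant
lemma pvInv_range (n : Int) (hn : 0 ≤ n) : pvInv (PySem.List.pyRange 0 (n+1) 1) := by
  intro j h0j hjl
  rw [pvRngLen n hn] at hjl
  rw [PySem.List.pyGetD_eq_getElem _ 0 h0j (by rw [pvRngLen n hn]; omega),
    PySem.List.getElem_pyRange_one]
  omega

lemma pvMain (n : Int) (edges : List (Int × Int)) (hn : 0 ≤ n)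
    (hedge : ∀ p ∈ edges, -(n+1) ≤ p.1 ∧ p.1 ≤ n ∧ -(n+1) ≤ p.2 ∧ p.2 ≤ n) :
    solve n edges = solve_alt n edges := by
  unfold solve solve_alt
  simp only []
  have hrlen : (PySem.List.pyRange 0 (n+1) 1).length = (n+1).toNat := pvRngLen n hn
  -- Source B's [x]*(n+1) literals are A's comprehensions over range(n+1)
  rw [show (List.replicate (n+1).toNat ([] : List Int))
        = ((PySem.List.pyRange 0 (n+1) 1).map (fun _ => ([] : List Int))) from by
      rw [List.map_const', hrlen],
    show (List.replicate (n+1).toNat false)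
        = ((PySem.List.pyRange 0 (n+1) 1).map (fun _ => false)) from by
      rw [List.map_const', hrlen],
    show (List.replicate (n+1).toNat (0:Int))
        = ((PySem.List.pyRange 0 (n+1) 1).map (fun _ => (0:Int))) from by
      rw [List.map_const', hrlen]]
  -- phase 1: A's union loop = foldl of Source B's loop body
  have hq' : ∀ q ∈ edges, -((PySem.List.pyRange 0 (n+1) 1).length:Int) ≤ q.1 ∧
      q.1 < ((PySem.List.pyRange 0 (n+1) 1).length : Int) ∧
      -((PySem.List.pyRange 0 (n+1) 1).length:Int) ≤ q.2 ∧
      q.2 < ((PySem.List.pyRange 0 (n+1) 1).length : Int) := by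
    intro q hq
    obtain ⟨h1, h2, h3, h4⟩ := hedge q hq
    refine ⟨by rw [hrlen]; omega, by rw [hrlen]; omega, by rw [hrlen]; omega, by rw [hrlen]; omega⟩
  rw [pvLoop1_eq edges ((n+1).toNat + 2) (PySem.List.pyRange 0 (n+1) 1) 0 0
    ((PySem.List.pyRange 0 (n+1) 1).map (fun _ => false)) (pvInv_range n hn)
    (by rw [hrlen]) hq']
  -- the adjacency lists coincide
  rw [pvBuild_eq edges]
  have hstb := pvFold1B_bounds n ((n+1).toNat + 2) edges
    (PySem.List.pyRange 0 (n+1) 1, 0, 0, (PySem.List.pyRange 0 (n+1) 1).map (fun _ => false))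
    hedge (by show -(n+1) ≤ (0:Int); omega) hn (by show -(n+1) ≤ (0:Int); omega) hn
  set st := edges.foldl (pvStep1B ((n+1).toNat + 2))
    (PySem.List.pyRange 0 (n+1) 1, 0, 0, (PySem.List.pyRange 0 (n+1) 1).map (fun _ => false)) with hst
  obtain ⟨hcs0, hcsn, hce0, hcen⟩ := hstb
  have hzlen : ((PySem.List.pyRange 0 (n+1) 1).map (fun _ => (0:Int))).length = (n+1).toNat := by
    rw [List.length_map, pvRngLen n hn]
  have hzl' : (((PySem.List.pyRange 0 (n+1) 1).map (fun _ => (0:Int))).length : Int) = n + 1 := by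
    rw [hzlen]; omega
  have hvlen : (PySem.List.pySetD (PySem.List.pySetD
      ((PySem.List.pyRange 0 (n+1) 1).map (fun _ => (0:Int))) st.2.1 1) st.2.2.1 1).length
      = (n+1).toNat := by
    rw [PySem.List.length_pySetD, PySem.List.length_pySetD, hzlen]
  have hcsv : PySem.List.pyGetD (PySem.List.pySetD (PySem.List.pySetD
      ((PySem.List.pyRange 0 (n+1) 1).map (fun _ => (0:Int))) st.2.1 1) st.2.2.1 1) st.2.1 0 ≠ 0 := by
    have hl1 : ((PySem.List.pySetD ((PySem.List.pyRange 0 (n+1) 1).map (fun _ => (0:Int))) st.2.1 1).length : Int)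
        = n + 1 := by rw [PySem.List.length_pySetD]; exact hzl'
    rw [pvGetD_setD' _ st.2.2.1 st.2.1 1 0 (by omega) (by omega) (by omega) (by omega)]
    split
    · omega
    · rw [pvGetD_setD' _ st.2.1 st.2.1 1 0 (by omega) (by omega) (by omega) (by omega),
        if_pos rfl]
      omega
  have hgb : ∀ (v : Int), ∀ x ∈ PySem.List.pyGetD
      (pvBuildGraph edges ((PySem.List.pyRange 0 (n+1) 1).map (fun _ => ([] : List Int)))) v [],
      -(n+1) ≤ x ∧ x ≤ n := by
    refine pvGetD_graph_bound _ _ ?_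
    refine pvBuildGraph_mem (fun x => -(n+1) ≤ x ∧ x ≤ n) edges _
      (fun p hp => ⟨⟨(hedge p hp).1, (hedge p hp).2.1⟩, ⟨(hedge p hp).2.2.1, (hedge p hp).2.2.2⟩⟩) ?_
    intro l hl x hx
    obtain ⟨w, hw, hwl⟩ := List.mem_map.1 hl
    rw [← hwl] at hx
    simp at hx
  have hbfs := pvBfs_eq n st.2.1 st.2.2.1 hn hcs0 hcsn _ hgb (2 * (n+1).toNat + 2)
    (fun L hnd hb => pvNodupBound n hn L hnd hb) ((n+1).toNat + 2)
    [(st.2.1, PySem.Int.toChars st.2.1)] [st.2.1]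
    ((PySem.List.pyRange 0 (n+1) 1).map (fun _ => (0:Int)))
    (PySem.List.pySetD (PySem.List.pySetD
      ((PySem.List.pyRange 0 (n+1) 1).map (fun _ => (0:Int))) st.2.1 1) st.2.2.1 1)
    st.2.2.2 hvlen hzlen hcsv
    (List.Forall₂.cons ⟨[], rfl, rfl, pvWalkRel.nil, List.nodup_nil, by simp, hcs0, hcsn⟩ List.Forall₂.nil)
  rw [hbfs]
  -- phase 3: A's init loop + right-popped deque = Source B's comprehensions + left stack
  set isc := pvBfsB
    (pvBuildGraph edges ((PySem.List.pyRange 0 (n+1) 1).map (fun _ => ([] : List Int))))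
    st.2.2.1 st.2.1 (2 * (n+1).toNat + 2) ((n+1).toNat + 2) [st.2.1]
    ((PySem.List.pyRange 0 (n+1) 1).map (fun _ => (0:Int)))
    (PySem.List.pySetD (PySem.List.pySetD
      ((PySem.List.pyRange 0 (n+1) 1).map (fun _ => (0:Int))) st.2.1 1) st.2.2.1 1)
    st.2.2.2 with hisc
  rw [pvInit3_split isc (PySem.List.pyRange 1 (n+1) 1) []
    ((PySem.List.pyRange 0 (n+1) 1).map (fun _ => (-1:Int)))]
  simp only [List.nil_append]
  rw [pvStack0_eq n (fun v => PySem.List.pyGetD isc v false),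
    ← pvDist0_eq n hn isc,
    pvLoopD_eq _ (2 * (n+1).toNat + 2)
      (((PySem.List.pyRange 1 (n+1) 1).filter (fun v => PySem.List.pyGetD isc v false)).reverse),
    List.reverse_reverse]

-- ===== VERDICT (by name: the statement is the Claim_ definition above) =====
theorem solve_spec : Claim_equal_solve := by
  intro n edges _ hpre
  exact pvMain n edges hpre.1 hpre.2
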